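-- pv_equiv track=rewrite | github.com/Nyasa-Roy/advent-of-code | 2025/python/day 9.py | build_allowed_tiles
-- ===== SOURCE A (Python) =====
-- from collections import deque
--
-- def build_allowed_tiles(red_points):
--     red = set(red_points)
--     green = set()
--
--     n = len(red_points)
--     for i in range(n):
--         x1, y1 = red_points[i]
--         x2, y2 = red_points[(i + 1) % n]
--
--         if x1 == x2:
--             for y in range(min(y1, y2), max(y1, y2) + 1):
--                 if (x1, y) not in red:
--                     green.add((x1, y))
--         else:
--             for x in range(min(x1, x2), max(x1, x2) + 1):
--                 if (x, y1) not in red: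
--                     green.add((x, y1))
--
--     boundary = red | green
--
--     # Coordinate compression
--     xs = sorted({x for x, y in boundary})
--     ys = sorted({y for x, y in boundary})
--
--     x_index = {x: i for i, x in enumerate(xs)}
--     y_index = {y: i for i, y in enumerate(ys)}
--
--     W, H = len(xs), len(ys)
--     grid = [[0] * H for _ in range(W)]
--
--     for x, y in boundary:
--         grid[x_index[x]][y_index[y]] = 1  # wall
--
--     # Flood fill from outside
--     visited = [[False] * H for _ in range(W)]
--     queue = deque()
--
--     for i in range(W):
--         queue.append((i, 0))
--         queue.append((i, H - 1))
--     for j in range(H):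
--         queue.append((0, j))
--         queue.append((W - 1, j))
--
--     while queue:
--         x, y = queue.popleft()
--         if not (0 <= x < W and 0 <= y < H):
--             continue
--         if visited[x][y] or grid[x][y] == 1:
--             continue
--         visited[x][y] = True
--         for dx, dy in [(1,0),(-1,0),(0,1),(0,-1)]:
--             queue.append((x + dx, y + dy))
--
--     allowed = set(boundary)
--     for x in range(W):
--         for y in range(H):
--             if not visited[x][y]:
--                 allowed.add((xs[x], ys[y]))
--
--     return red, allowed
-- ===== SOURCE B (Python) =====
-- def build_allowed_tiles(red_points):
--     red = set(red_points)
--     green = set()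
--     for (x1, y1), (x2, y2) in zip(red_points, red_points[1:] + red_points[:1]):
--         if x1 == x2:
--             green.update((x1, y) for y in range(min(y1, y2), max(y1, y2) + 1)
--                          if (x1, y) not in red)
--         else:
--             green.update((x, y1) for x in range(min(x1, x2), max(x1, x2) + 1)
--                          if (x, y1) not in red)
--     boundary = red | green
--
--     xs = sorted({x for x, _ in boundary})
--     ys = sorted({y for _, y in boundary})
--     W, H = len(xs), len(ys)
--     x_index = {x: i for i, x in enumerate(xs)}
--     y_index = {y: i for i, y in enumerate(ys)}
--     # compressed cells as flat integers i * H + j; wall cells = images of boundary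
--     wall = {x_index[x] * H + y_index[y] for x, y in boundary}
--
--     # Union-find connected components with a virtual 'outside' node OUT = W*H:
--     # union each non-wall cell with its non-wall right/down neighbours, and each
--     # border non-wall cell with OUT; a cell leaks iff its root is OUT's root.
--     OUT = W * H
--     edges = []
--     for i in range(W):
--         for j in range(H):
--             c = i * H + j
--             if c in wall:
--                 continue
--             if i + 1 < W and c + H not in wall:
--                 edges.append((c, c + H))
--             if j + 1 < H and c + 1 not in wall:
--                 edges.append((c, c + 1))
--             if i == 0 or i == W - 1 or j == 0 or j == H - 1:
--                 edges.append((c, OUT))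
--
--     parent = list(range(OUT + 1))
--
--     def find(i):
--         r = i
--         while parent[r] < r:
--             r = parent[r]
--         while parent[i] < i:
--             parent[i], i = r, parent[i]
--         return r
--
--     def union(a, b):
--         ra, rb = find(a), find(b)
--         if ra != rb:
--             parent[max(ra, rb)] = min(ra, rb)
--
--     for a, b in edges:
--         union(a, b)
--
--     root_out = find(OUT)
--     allowed = set(boundary)
--     allowed.update((xs[i], ys[j])
--                    for i in range(W) for j in range(H)
--                    if i * H + j in wall or find(i * H + j) != root_out)
--     return red, allowed
-- ===== Notes on version B (the rewrite author's own statement) =====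
-- stated objective: alternative
-- what changed: The BFS flood fill from the border (deque + visited matrix) is replaced by union-find connected components: a virtual outside node is unioned with every border non-wall cell and every non-wall cell with its non-wall right/down neighbours, and a lattice point is allowed iff its cell is a wall or its root differs from the outside node's root; the index dicts become list.index lookups and the 0/1 grid becomes a flat wall set.
import Mathlib
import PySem

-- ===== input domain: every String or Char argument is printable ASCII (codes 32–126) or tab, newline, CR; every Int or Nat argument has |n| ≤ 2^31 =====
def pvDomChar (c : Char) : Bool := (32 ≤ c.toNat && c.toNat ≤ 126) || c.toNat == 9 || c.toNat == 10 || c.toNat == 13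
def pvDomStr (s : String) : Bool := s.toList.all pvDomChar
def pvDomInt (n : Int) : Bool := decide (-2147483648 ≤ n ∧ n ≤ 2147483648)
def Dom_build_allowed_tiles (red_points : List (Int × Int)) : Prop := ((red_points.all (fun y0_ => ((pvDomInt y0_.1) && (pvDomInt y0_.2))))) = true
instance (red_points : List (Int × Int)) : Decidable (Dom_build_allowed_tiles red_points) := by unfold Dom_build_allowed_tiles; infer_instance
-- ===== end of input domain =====

-- B replaces A's deque-BFS flood fill by union-find connected components (a virtual
-- outside node unioned with border cells and each non-wall cell with its right/down
-- non-wall neighbours); same return value, proved equal.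

-- ===== PORT A =====
-- 2-dimensional list read/write, exactly Python's g[x][y] / g[x][y] = v on in-range indices
def pvGet2 {α : Type} (g : List (List α)) (x y : Int) (d : α) : α :=
  PySem.List.pyGetD (PySem.List.pyGetD g x []) y d

def pvSet2 {α : Type} (g : List (List α)) (x y : Int) (v : α) : List (List α) :=
  PySem.List.pySetD g x (PySem.List.pySetD (PySem.List.pyGetD g x []) y v)

-- shape of a W×H matrix (totality support for pvBfs)
def pvDims {α : Type} (g : List (List α)) (W H : Nat) : Prop :=
  g.length = W ∧ ∀ r ∈ g, r.length = H

def pvCountFalse (g : List (List Bool)) : Nat := (g.map (fun r => r.count false)).sum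

theorem pvDims_pvSet2 {α : Type} {g : List (List α)} {W H : Nat} {x y : Int} {v : α}
    (h : pvDims g W H) (hx0 : 0 ≤ x) (hx : x.toNat < g.length) :
    pvDims (pvSet2 g x y v) W H := by
  have hxI : x < (g.length : Int) := by omega
  have hrow : PySem.List.pyGetD g x [] = g[x.toNat] :=
    PySem.List.pyGetD_eq_getElem g [] hx0 hxI
  unfold pvSet2
  rw [PySem.List.pySetD_of_nonneg _ _ hx0]
  constructor
  · simpa using h.1
  · intro r hr
    rcases List.mem_or_eq_of_mem_set hr with h' | h'
    · exact h.2 r h'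
    · subst h'
      rw [PySem.List.length_pySetD, hrow]
      exact h.2 _ (List.getElem_mem hx)

theorem pvRowCount_set_lt (r : List Bool) (n : Nat) (hn : n < r.length)
    (hf : r[n] = false) : (r.set n true).count false < r.count false := by
  induction r generalizing n with
  | nil => simp at hn
  | cons a t ih =>
    cases n with
    | zero =>
      simp at hf; subst hf
      simp
    | succ m =>
      have hm : m < t.length := by simpa using hn
      have := ih m hm (by simpa using hf)
      simp [List.count_cons]
      omega

theorem pvCountFalse_set_lt (g : List (List Bool)) (n : Nat) (r : List Bool)
    (hn : n < g.length) (hlt : r.count false < (g[n]).count false) :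
    pvCountFalse (g.set n r) < pvCountFalse g := by
  induction g generalizing n with
  | nil => simp at hn
  | cons a t ih =>
    cases n with
    | zero =>
      simp [pvCountFalse] at hlt ⊢
      omega
    | succ m =>
      have hm : m < t.length := by simpa using hn
      have := ih m hm (by simpa using hlt)
      simp [pvCountFalse] at this ⊢
      omega

theorem pvCountFalse_pvSet2_lt (g : List (List Bool)) (x y : Int)
    (hx0 : 0 ≤ x) (hx : x.toNat < g.length) (hy0 : 0 ≤ y)
    (hy : y.toNat < (g[x.toNat]'hx).length)
    (hf : pvGet2 g x y false = false) :
    pvCountFalse (pvSet2 g x y true) < pvCountFalse g := by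
  have hxI : x < (g.length : Int) := by omega
  have hrow : PySem.List.pyGetD g x [] = g[x.toNat] :=
    PySem.List.pyGetD_eq_getElem g [] hx0 hxI
  have hyI : y < ((g[x.toNat]'hx).length : Int) := by omega
  have hyget : pvGet2 g x y false = (g[x.toNat]'hx)[y.toNat]'hy := by
    unfold pvGet2
    rw [hrow]
    exact PySem.List.pyGetD_eq_getElem _ false hy0 hyI
  unfold pvSet2
  rw [hrow, PySem.List.pySetD_of_nonneg _ _ hy0, PySem.List.pySetD_of_nonneg _ _ hx0]
  apply pvCountFalse_set_lt _ _ _ hx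
  apply pvRowCount_set_lt _ _ hy
  rw [← hyget]; exact hf

theorem pvDims_vis0 (W H : Int) :
    pvDims ((PySem.List.pyRange 0 W 1).map (fun _ => List.replicate H.toNat false)) W.toNat H.toNat := by
  constructor
  · simp [PySem.List.length_pyRange_one]
  · intro r hr
    rcases List.mem_map.1 hr with ⟨i, _, rfl⟩
    exact List.length_replicate

-- flood fill from the queue, exactly A's while-loop
def pvBfs (W H : Int) (grid : List (List Int)) :
    (vis : List (List Bool)) → (q : List (Int × Int)) →
    pvDims vis W.toNat H.toNat → List (List Bool)
  | vis, [], _ => vis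
  | vis, c :: rest, hd =>
    if h1 : 0 ≤ c.1 ∧ c.1 < W ∧ 0 ≤ c.2 ∧ c.2 < H then
      if pvGet2 vis c.1 c.2 false = true ∨ pvGet2 grid c.1 c.2 0 = 1 then
        pvBfs W H grid vis rest hd
      else
        pvBfs W H grid (pvSet2 vis c.1 c.2 true)
          (rest ++ [(c.1 + 1, c.2), (c.1 - 1, c.2), (c.1, c.2 + 1), (c.1, c.2 - 1)])
          (pvDims_pvSet2 hd h1.1 (by have := hd.1; omega))
    else
      pvBfs W H grid vis rest hd
  termination_by vis q _ => (pvCountFalse vis, q.length)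
  decreasing_by
  · apply Prod.Lex.right; simp
  · apply Prod.Lex.left
    have hx : c.1.toNat < vis.length := by have := hd.1; omega
    have hrow : (vis[c.1.toNat]'hx).length = H.toNat := hd.2 _ (List.getElem_mem hx)
    apply pvCountFalse_pvSet2_lt vis c.1 c.2 h1.1 hx h1.2.2.1
    · omega
    · rename_i h2
      have h2' : pvGet2 vis c.1 c.2 false = false ∧ ¬pvGet2 grid c.1 c.2 0 = 1 := by
        simpa using h2
      exact h2'.1
  · apply Prod.Lex.right; simp

-- xs = sorted({x for x, y in boundary}) (same line in A and in B)
def pvXs (boundary : List (Int × Int)) : List Int :=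
  PySem.List.sorted (PySem.Set.ofList (boundary.map Prod.fst)) (fun v => v) false

def pvYs (boundary : List (Int × Int)) : List Int :=
  PySem.List.sorted (PySem.Set.ofList (boundary.map Prod.snd)) (fun v => v) false

def build_allowed_tiles (red_points : List (Int × Int)) : (List (Int × Int)) × (List (Int × Int)) :=
  let red : PySem.Set (Int × Int) := PySem.Set.ofList red_points
  let n : Int := red_points.length
  let green : PySem.Set (Int × Int) :=
    (PySem.List.pyRange 0 n 1).foldl (fun green i =>
      let p1 := PySem.List.pyGetD red_points i (0, 0)
      let p2 := PySem.List.pyGetD red_points (PySem.Int.mod (i + 1) n) (0, 0)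
      if p1.1 = p2.1 then
        (PySem.List.pyRange (min p1.2 p2.2) (max p1.2 p2.2 + 1) 1).foldl
          (fun green y => if (p1.1, y) ∉ red then PySem.Set.add green (p1.1, y) else green) green
      else
        (PySem.List.pyRange (min p1.1 p2.1) (max p1.1 p2.1 + 1) 1).foldl
          (fun green x => if (x, p1.2) ∉ red then PySem.Set.add green (x, p1.2) else green) green)
      PySem.Set.empty
  let boundary : PySem.Set (Int × Int) := PySem.Set.union red green
  let xs := pvXs boundary
  let ys := pvYs boundary
  let x_index : PySem.Dict Int Int :=
    (PySem.List.enumerate xs 0).foldl (fun d p => d.insert p.2 p.1) PySem.Dict.empty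
  let y_index : PySem.Dict Int Int :=
    (PySem.List.enumerate ys 0).foldl (fun d p => d.insert p.2 p.1) PySem.Dict.empty
  let W : Int := xs.length
  let H : Int := ys.length
  let grid : List (List Int) :=
    boundary.foldl (fun g p => pvSet2 g (x_index.getD p.1 0) (y_index.getD p.2 0) 1)
      ((PySem.List.pyRange 0 W 1).map (fun _ => List.replicate H.toNat 0))
  let vis0 : List (List Bool) := (PySem.List.pyRange 0 W 1).map (fun _ => List.replicate H.toNat false)
  let q0 : List (Int × Int) := (PySem.List.pyRange 0 W 1).foldl (fun q i => q ++ [(i, 0), (i, H - 1)]) []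
  let q1 : List (Int × Int) := (PySem.List.pyRange 0 H 1).foldl (fun q j => q ++ [(0, j), (W - 1, j)]) q0
  let visited := pvBfs W H grid vis0 q1 (pvDims_vis0 W H)
  let allowed0 : PySem.Set (Int × Int) := PySem.Set.ofList boundary
  let allowed :=
    (PySem.List.pyRange 0 W 1).foldl (fun al x =>
      (PySem.List.pyRange 0 H 1).foldl (fun al y =>
        if ¬ (pvGet2 visited x y false = true) then
          PySem.Set.add al (PySem.List.pyGetD xs x 0, PySem.List.pyGetD ys y 0)
        else al) al) allowed0
  (red, allowed)

-- ===== PORT B =====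
-- first loop of B's find: `while parent[r] < r: r = parent[r]` (invariant
-- parent[i] <= i makes this Python's root chase); total by the decreasing index
def dsuRoot (p : List Nat) (x : Nat) : Nat :=
  if h : p.getD x x < x then dsuRoot p (p.getD x x) else x
  termination_by x
  decreasing_by exact h

-- second loop of B's find: point every node on the walked path at the root r
def dsuCompress (p : List Nat) (i r : Nat) : List Nat :=
  if h : p.getD i i < i then dsuCompress (p.set i r) (p.getD i i) r else p
  termination_by i
  decreasing_by exact h

-- B's union(a, b): find(a), find(b) (root chase + path compression), then link
def dsuUnion (p : List Nat) (a b : Nat) : List Nat :=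
  let ra := dsuRoot p a
  let p1 := dsuCompress p a ra
  let rb := dsuRoot p1 b
  let p2 := dsuCompress p1 b rb
  if ra ≠ rb then p2.set (max ra rb) (min ra rb) else p2

-- B's edge-building double loop (appends become list concatenation); the wall
-- set holds Python ints, the flat cell index is cast into it for the lookups
def pvEdgesB (W H : Nat) (wall : PySem.Set Int) : List (Nat × Nat) :=
  (List.range W).flatMap (fun i =>
    (List.range H).flatMap (fun j =>
      let c := i * H + j
      if PySem.Set.contains wall (c : Int) then [] else
        (if i + 1 < W ∧ PySem.Set.contains wall ((c + H : Nat) : Int) = false then [(c, c + H)] else []) ++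
        (if j + 1 < H ∧ PySem.Set.contains wall ((c + 1 : Nat) : Int) = false then [(c, c + 1)] else []) ++
        (if i = 0 ∨ i = W - 1 ∨ j = 0 ∨ j = H - 1 then [(c, W * H)] else [])))

def build_allowed_tiles_alt (red_points : List (Int × Int)) : (List (Int × Int)) × (List (Int × Int)) :=
  let red : PySem.Set (Int × Int) := PySem.Set.ofList red_points
  let green : PySem.Set (Int × Int) :=
    (red_points.zip (PySem.List.slice red_points (some 1) none ++ PySem.List.slice red_points none (some 1))).foldl
      (fun green e =>
        if e.1.1 = e.2.1 then
          PySem.Set.update green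
            (((PySem.List.pyRange (min e.1.2 e.2.2) (max e.1.2 e.2.2 + 1) 1).filter
              (fun y => !(PySem.Set.contains red (e.1.1, y)))).map (fun y => (e.1.1, y)))
        else
          PySem.Set.update green
            (((PySem.List.pyRange (min e.1.1 e.2.1) (max e.1.1 e.2.1 + 1) 1).filter
              (fun x => !(PySem.Set.contains red (x, e.1.2)))).map (fun x => (x, e.1.2))))
      PySem.Set.empty
  let boundary : PySem.Set (Int × Int) := PySem.Set.union red green
  let xs := pvXs boundary
  let ys := pvYs boundary
  let x_index : PySem.Dict Int Int :=
    (PySem.List.enumerate xs 0).foldl (fun d p => d.insert p.2 p.1) PySem.Dict.empty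
  let y_index : PySem.Dict Int Int :=
    (PySem.List.enumerate ys 0).foldl (fun d p => d.insert p.2 p.1) PySem.Dict.empty
  let W : Nat := xs.length
  let H : Nat := ys.length
  let wall : PySem.Set Int :=
    PySem.Set.ofList (boundary.map (fun p =>
      x_index.getD p.1 0 * (H : Int) + y_index.getD p.2 0))
  let OUT : Nat := W * H
  let edges : List (Nat × Nat) := pvEdgesB W H wall
  let parent : List Nat := edges.foldl (fun p e => dsuUnion p e.1 e.2) (List.range (OUT + 1))
  -- Python's later find calls keep compressing parent, but compression never
  -- changes root values (dsuCompress_root below), so the port reads roots with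
  -- dsuRoot on the post-union list: value-exact
  let root_out : Nat := dsuRoot parent OUT
  let allowed : PySem.Set (Int × Int) :=
    PySem.Set.update (PySem.Set.ofList boundary)
      ((List.range W).flatMap (fun i =>
        ((List.range H).filter (fun j =>
            PySem.Set.contains wall ((i * H + j : Nat) : Int) || (dsuRoot parent (i * H + j) != root_out))).map
          (fun j => (xs.getD i 0, ys.getD j 0))))
  (red, allowed)

-- ===== PRECONDITION & SPEC =====
def Spec_build_allowed_tiles (red_points : List (Int × Int)) (out : (List (Int × Int)) × (List (Int × Int))) : Prop := out = build_allowed_tiles_alt red_points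
instance (red_points : List (Int × Int)) (out : (List (Int × Int)) × (List (Int × Int))) : Decidable (Spec_build_allowed_tiles red_points out) := by unfold Spec_build_allowed_tiles; infer_instance

-- ===== CLAIM (what is proved, stated in full; the proofs are below) =====
def Claim_equal_build_allowed_tiles : Prop := ∀ (red_points : List (Int × Int)), Dom_build_allowed_tiles red_points → Spec_build_allowed_tiles red_points (build_allowed_tiles red_points)

-- ===== LEMMAS AND PROOFS =====

def pvNbrs (c : Int × Int) : List (Int × Int) :=
  [(c.1 + 1, c.2), (c.1 - 1, c.2), (c.1, c.2 + 1), (c.1, c.2 - 1)]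

theorem pvGetD_set_ne (p : List Nat) (m v x : Nat) (h : x ≠ m) :
    (p.set m v).getD x x = p.getD x x := by
  rw [List.getD_eq_getElem?_getD, List.getD_eq_getElem?_getD, List.getElem?_set_ne (by omega)]

theorem dsuRoot_le (p : List Nat) (x : Nat) : dsuRoot p x ≤ x := by
  induction x using Nat.strong_induction_on with
  | _ x ih =>
    rw [dsuRoot]
    split_ifs with h
    · exact le_trans (ih _ h) (le_of_lt h)
    · exact le_refl x

theorem dsuRoot_stop (p : List Nat) (x : Nat) :
    ¬ p.getD (dsuRoot p x) (dsuRoot p x) < dsuRoot p x := by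
  induction x using Nat.strong_induction_on with
  | _ x ih =>
    rw [dsuRoot]
    split_ifs with h
    · exact ih _ h
    · exact h

def DsuInv (p : List Nat) : Prop := ∀ i, p.getD i i ≤ i

theorem dsuRoot_root (p : List Nat) (hInv : DsuInv p) (x : Nat) :
    p.getD (dsuRoot p x) (dsuRoot p x) = dsuRoot p x :=
  le_antisymm (hInv _) (not_lt.1 (dsuRoot_stop p x))

theorem dsuRoot_of_root (p : List Nat) (x : Nat) (h : ¬ p.getD x x < x) : dsuRoot p x = x := by
  rw [dsuRoot, dif_neg h]

theorem dsuRoot_idem (p : List Nat) (x : Nat) : dsuRoot p (dsuRoot p x) = dsuRoot p x :=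
  dsuRoot_of_root p _ (dsuRoot_stop p x)

theorem dsuRoot_set_lt (p : List Nat) (m v : Nat) :
    ∀ x, x < m → dsuRoot (p.set m v) x = dsuRoot p x := by
  intro x
  induction x using Nat.strong_induction_on with
  | _ x ih =>
    intro hxm
    have hg := pvGetD_set_ne p m v x (by omega)
    by_cases h : p.getD x x < x
    · rw [dsuRoot, hg, dif_pos h]
      conv_rhs => rw [dsuRoot, dif_pos h]
      exact ih _ h (lt_trans h hxm)
    · rw [dsuRoot, hg, dif_neg h]
      conv_rhs => rw [dsuRoot, dif_neg h]

theorem dsuRoot_set (p : List Nat) (m v : Nat) (hm : m < p.length)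
    (hroot : p.getD m m = m) (hv : v < m) :
    ∀ x, dsuRoot (p.set m v) x = if dsuRoot p x = m then dsuRoot p v else dsuRoot p x := by
  intro x
  induction x using Nat.strong_induction_on with
  | _ x ih =>
    by_cases hxm : x = m
    · subst hxm
      have hg : (p.set x v).getD x x = v := by
        rw [List.getD_eq_getElem?_getD, List.getElem?_set_self (by omega)]
        rfl
      rw [dsuRoot, hg, dif_pos hv, dsuRoot_set_lt p x v v hv,
        dsuRoot_of_root p x (by omega), if_pos rfl]
    · have hg := pvGetD_set_ne p m v x hxm
      by_cases h : p.getD x x < x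
      · rw [dsuRoot, hg, dif_pos h, ih _ h]
        conv_rhs => rw [dsuRoot, dif_pos h]
      · rw [dsuRoot, hg, dif_neg h, dsuRoot_of_root p x h, if_neg hxm]

inductive pvConn (R : Nat → Nat → Prop) : Nat → Nat → Prop where
  | rel {x y} : R x y → pvConn R x y
  | refl (x) : pvConn R x x
  | symm {x y} : pvConn R x y → pvConn R y x
  | trans {x y z} : pvConn R x y → pvConn R y z → pvConn R x z

theorem pvConn_lift {R R' : Nat → Nat → Prop} (h : ∀ x y, R x y → pvConn R' x y) :
    ∀ {x y}, pvConn R x y → pvConn R' x y := by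
  intro x y hc
  induction hc with
  | rel hr => exact h _ _ hr
  | refl x => exact pvConn.refl x
  | symm _ ih => exact pvConn.symm ih
  | trans _ _ ih1 ih2 => exact pvConn.trans ih1 ih2

def pvRepr (p : List Nat) (R : Nat → Nat → Prop) : Prop :=
  ∀ x y, dsuRoot p x = dsuRoot p y ↔ pvConn R x y

theorem dsuRoot_range (n x : Nat) : dsuRoot (List.range n) x = x := by
  apply dsuRoot_of_root
  by_cases h : x < n
  · rw [List.getD_eq_getElem?_getD, List.getElem?_range h]; simp
  · rw [List.getD_eq_getElem?_getD, List.getElem?_eq_none (by simpa using h)]; simp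

theorem pvConn_bot {x y : Nat} : pvConn (fun _ _ => False) x y ↔ x = y := by
  constructor
  · intro h
    induction h with
    | rel hr => exact absurd hr (by simp)
    | refl x => rfl
    | symm _ ih => omega
    | trans _ _ ih1 ih2 => omega
  · rintro rfl; exact pvConn.refl x

theorem pvRepr_range (n : Nat) : pvRepr (List.range n) (fun _ _ => False) := by
  intro x y
  rw [dsuRoot_range, dsuRoot_range, pvConn_bot]

theorem pvDsuInv_range (n : Nat) : DsuInv (List.range n) := by
  intro i
  by_cases h : i < n
  · rw [List.getD_eq_getElem?_getD, List.getElem?_range h]; simp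
  · rw [List.getD_eq_getElem?_getD, List.getElem?_eq_none (by simpa using h)]; simp

-- the linking step of union, on an already-compressed state
def dsuLink (p : List Nat) (a b : Nat) : List Nat :=
  let ra := dsuRoot p a
  let rb := dsuRoot p b
  if ra ≠ rb then p.set (max ra rb) (min ra rb) else p

theorem dsuLink_repr (p : List Nat) (S : Nat → Nat → Prop) (a b : Nat)
    (hInv : DsuInv p) (ha : a < p.length) (hb : b < p.length) (hR : pvRepr p S) :
    DsuInv (dsuLink p a b) ∧ (dsuLink p a b).length = p.length ∧
      pvRepr (dsuLink p a b) (fun x y => S x y ∨ (x = a ∧ y = b)) := by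
  unfold dsuLink
  by_cases hne : dsuRoot p a ≠ dsuRoot p b
  · rw [if_pos hne]
    set ra := dsuRoot p a with hra
    set rb := dsuRoot p b with hrb
    set mx := max ra rb with hmx
    set mn := min ra rb with hmn
    have hmnmx : mn < mx := min_lt_max.2 hne
    have hmxlen : mx < p.length := by
      have h1 := dsuRoot_le p a
      have h2 := dsuRoot_le p b
      rw [hmx]; omega
    have hmxroot : p.getD mx mx = mx := by
      rcases max_choice ra rb with h | h <;>
        · rw [hmx, h]
          exact dsuRoot_root p hInv _
    have hmnfix : dsuRoot p mn = mn := by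
      rcases min_choice ra rb with h | h <;>
        · rw [hmn, h]
          exact dsuRoot_idem p _
    have hset := dsuRoot_set p mx mn hmxlen hmxroot hmnmx
    have hsetf : ∀ x, dsuRoot (p.set mx mn) x = if dsuRoot p x = mx then mn else dsuRoot p x := by
      intro x; rw [hset x, hmnfix]
    have hab : (dsuRoot p a = mx ∧ dsuRoot p b = mn) ∨ (dsuRoot p a = mn ∧ dsuRoot p b = mx) := by
      rw [← hra, ← hrb, hmx, hmn]
      rcases max_choice ra rb with h | h
      · left; constructor
        · exact h.symm
        · rw [min_comm] at *
          omega
      · right; omega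
    refine ⟨?_, by simp, ?_⟩
    · intro i
      by_cases him : i = mx
      · subst him
        rw [List.getD_eq_getElem?_getD, List.getElem?_set_self (by omega)]
        simpa using le_of_lt hmnmx
      · rw [pvGetD_set_ne p mx mn i him]
        exact hInv i
    · intro x y
      rw [hsetf x, hsetf y]
      constructor
      · intro hxy
        by_cases hx : dsuRoot p x = mx <;> by_cases hy : dsuRoot p y = mx
        · exact pvConn_lift (fun u v h => pvConn.rel (Or.inl h)) ((hR x y).1 (by omega))
        · -- f x = mx, f y = mn
          rw [if_pos hx] at hxy
          rw [if_neg hy] at hxy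
          -- so dsuRoot p y = mn
          have hyn : dsuRoot p y = mn := hxy.symm
          have hconn : pvConn (fun u v => S u v ∨ (u = a ∧ v = b)) a b := pvConn.rel (Or.inr ⟨rfl, rfl⟩)
          rcases hab with ⟨h1, h2⟩ | ⟨h1, h2⟩
          · -- f a = mx = f x, f b = mn = f y
            have hxa : pvConn S x a := (hR x a).1 (by omega)
            have hyb : pvConn S y b := (hR y b).1 (by omega)
            exact pvConn.trans (pvConn_lift (fun u v h => pvConn.rel (Or.inl h)) hxa)
              (pvConn.trans hconn (pvConn.symm (pvConn_lift (fun u v h => pvConn.rel (Or.inl h)) hyb)))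
          · have hxb : pvConn S x b := (hR x b).1 (by omega)
            have hya : pvConn S y a := (hR y a).1 (by omega)
            exact pvConn.trans (pvConn_lift (fun u v h => pvConn.rel (Or.inl h)) hxb)
              (pvConn.trans (pvConn.symm hconn) (pvConn.symm (pvConn_lift (fun u v h => pvConn.rel (Or.inl h)) hya)))
        · rw [if_neg hx, if_pos hy] at hxy
          have hxn : dsuRoot p x = mn := hxy
          have hconn : pvConn (fun u v => S u v ∨ (u = a ∧ v = b)) a b := pvConn.rel (Or.inr ⟨rfl, rfl⟩)
          rcases hab with ⟨h1, h2⟩ | ⟨h1, h2⟩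
          · have hxb : pvConn S x b := (hR x b).1 (by omega)
            have hya : pvConn S y a := (hR y a).1 (by omega)
            exact pvConn.trans (pvConn_lift (fun u v h => pvConn.rel (Or.inl h)) hxb)
              (pvConn.trans (pvConn.symm hconn) (pvConn.symm (pvConn_lift (fun u v h => pvConn.rel (Or.inl h)) hya)))
          · have hxa : pvConn S x a := (hR x a).1 (by omega)
            have hyb : pvConn S y b := (hR y b).1 (by omega)
            exact pvConn.trans (pvConn_lift (fun u v h => pvConn.rel (Or.inl h)) hxa)
              (pvConn.trans hconn (pvConn.symm (pvConn_lift (fun u v h => pvConn.rel (Or.inl h)) hyb)))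
        · rw [if_neg hx, if_neg hy] at hxy
          exact pvConn_lift (fun u v h => pvConn.rel (Or.inl h)) ((hR x y).1 hxy)
      · intro hc
        induction hc with
        | rel hr =>
          rcases hr with hr | ⟨rfl, rfl⟩
          · have := (hR _ _).2 (pvConn.rel hr)
            rw [this]
          · rcases hab with ⟨h1, h2⟩ | ⟨h1, h2⟩ <;> simp [h1, h2]
        | refl x => rfl
        | symm _ ih => omega
        | trans _ _ ih1 ih2 => omega
  · rw [if_neg hne]
    simp only [ne_eq, not_not] at hne
    refine ⟨hInv, rfl, ?_⟩
    intro x y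
    rw [hR x y]
    constructor
    · exact pvConn_lift (fun u v h => pvConn.rel (Or.inl h))
    · intro hc
      induction hc with
      | rel hr =>
        rcases hr with hr | ⟨rfl, rfl⟩
        · exact pvConn.rel hr
        · exact (hR _ _).1 hne
      | refl x => exact pvConn.refl x
      | symm _ ih => exact pvConn.symm ih
      | trans _ _ ih1 ih2 => exact pvConn.trans ih1 ih2

theorem dsuRoot_set_selfroot (p : List Nat) (x : Nat) :
    ∀ y, dsuRoot (p.set x (dsuRoot p x)) y = dsuRoot p y := by
  intro y
  induction y using Nat.strong_induction_on with
  | _ y ih =>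
    by_cases hyx : y = x
    · subst hyx
      by_cases hlen : y < p.length
      · have hg : (p.set y (dsuRoot p y)).getD y y = dsuRoot p y := by
          rw [List.getD_eq_getElem?_getD, List.getElem?_set_self (by omega)]
          rfl
        by_cases hr : dsuRoot p y < y
        · rw [dsuRoot, hg, dif_pos hr, ih _ hr, dsuRoot_idem]
        · have hry : dsuRoot p y = y := le_antisymm (dsuRoot_le p y) (not_lt.1 hr)
          rw [dsuRoot, hg, dif_neg hr]
          exact hry.symm
      · rw [List.set_eq_of_length_le (by omega)]
    · have hg := pvGetD_set_ne p x (dsuRoot p x) y hyx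
      by_cases h : p.getD y y < y
      · rw [dsuRoot, hg, dif_pos h, ih _ h]
        conv_rhs => rw [dsuRoot, dif_pos h]
      · rw [dsuRoot, hg, dif_neg h]
        conv_rhs => rw [dsuRoot, dif_neg h]

theorem dsuCompress_root (p : List Nat) (i r : Nat) :
    r = dsuRoot p i →
    (∀ y, dsuRoot (dsuCompress p i r) y = dsuRoot p y) ∧ (dsuCompress p i r).length = p.length := by
  induction p, i using dsuCompress.induct r with
  | case1 p i h ih =>
    rintro rfl
    have hstep : dsuRoot p i = dsuRoot p (p.getD i i) := by
      conv_lhs => rw [dsuRoot, dif_pos h]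
    have hr' : dsuRoot p i = dsuRoot (p.set i (dsuRoot p i)) (p.getD i i) := by
      rw [dsuRoot_set_selfroot p i (p.getD i i), ← hstep]
    obtain ⟨ihr, ihl⟩ := ih hr'
    rw [dsuCompress, dif_pos h]
    constructor
    · intro y
      rw [ihr y, dsuRoot_set_selfroot p i y]
    · rw [ihl, List.length_set]
  | case2 p i h =>
    intro _
    rw [dsuCompress, dif_neg h]
    exact ⟨fun _ => rfl, rfl⟩

theorem dsuCompress_inv (p : List Nat) (i r : Nat) :
    DsuInv p → r = dsuRoot p i → DsuInv (dsuCompress p i r) := by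
  induction p, i using dsuCompress.induct r with
  | case1 p i h ih =>
    intro hInv hr
    subst hr
    have hstep : dsuRoot p i = dsuRoot p (p.getD i i) := by
      conv_lhs => rw [dsuRoot, dif_pos h]
    have hr' : dsuRoot p i = dsuRoot (p.set i (dsuRoot p i)) (p.getD i i) := by
      rw [dsuRoot_set_selfroot p i (p.getD i i), ← hstep]
    have hInv' : DsuInv (p.set i (dsuRoot p i)) := by
      intro k
      by_cases hki : k = i
      · subst hki
        by_cases hlen : k < p.length
        · rw [List.getD_eq_getElem?_getD, List.getElem?_set_self (by omega)]
          simpa using dsuRoot_le p k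
        · rw [List.set_eq_of_length_le (by omega)]
          exact hInv k
      · rw [pvGetD_set_ne p i (dsuRoot p i) k hki]
        exact hInv k
    rw [dsuCompress, dif_pos h]
    exact ih hInv' hr'
  | case2 p i h =>
    intro hInv _
    rw [dsuCompress, dif_neg h]
    exact hInv

theorem dsuUnion_repr (p : List Nat) (S : Nat → Nat → Prop) (a b : Nat)
    (hInv : DsuInv p) (ha : a < p.length) (hb : b < p.length) (hR : pvRepr p S) :
    DsuInv (dsuUnion p a b) ∧ (dsuUnion p a b).length = p.length ∧
      pvRepr (dsuUnion p a b) (fun x y => S x y ∨ (x = a ∧ y = b)) := by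
  have hc1 := dsuCompress_root p a (dsuRoot p a) rfl
  have hI1 := dsuCompress_inv p a (dsuRoot p a) hInv rfl
  set p1 := dsuCompress p a (dsuRoot p a) with hp1
  have hc2 := dsuCompress_root p1 b (dsuRoot p1 b) rfl
  have hI2 := dsuCompress_inv p1 b (dsuRoot p1 b) hI1 rfl
  set p2 := dsuCompress p1 b (dsuRoot p1 b) with hp2
  have hroots : ∀ y, dsuRoot p2 y = dsuRoot p y := fun y => (hc2.1 y).trans (hc1.1 y)
  have hlen : p2.length = p.length := hc2.2.trans hc1.2
  have hRp2 : pvRepr p2 S := fun x y => by rw [hroots x, hroots y]; exact hR x y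
  have heq : dsuUnion p a b = dsuLink p2 a b := by
    have h1 : dsuRoot p1 b = dsuRoot p b := hc1.1 b
    have h2 : dsuRoot p2 a = dsuRoot p a := hroots a
    have h3 : dsuRoot p2 b = dsuRoot p b := hroots b
    simp only [dsuUnion, dsuLink, ← hp1, ← hp2]
    rw [h1, h2, h3]
  rw [heq]
  have hres := dsuLink_repr p2 S a b hI2 (by omega) (by omega) hRp2
  exact ⟨hres.1, hres.2.1.trans hlen, hres.2.2⟩

theorem pvConn_congr {R R' : Nat → Nat → Prop} (h : ∀ x y, R x y ↔ R' x y) :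
    ∀ {x y}, pvConn R x y ↔ pvConn R' x y :=
  fun {x y} => ⟨pvConn_lift (fun u v hr => pvConn.rel ((h u v).1 hr)),
    pvConn_lift (fun u v hr => pvConn.rel ((h u v).2 hr))⟩

theorem dsuFold_repr : ∀ (E : List (Nat × Nat)) (p : List Nat) (S : Nat → Nat → Prop),
    DsuInv p → pvRepr p S → (∀ e ∈ E, e.1 < p.length ∧ e.2 < p.length) →
    DsuInv (E.foldl (fun p e => dsuUnion p e.1 e.2) p) ∧
    (E.foldl (fun p e => dsuUnion p e.1 e.2) p).length = p.length ∧
    pvRepr (E.foldl (fun p e => dsuUnion p e.1 e.2) p) (fun x y => S x y ∨ (x, y) ∈ E) := by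
  intro E
  induction E with
  | nil =>
    intro p S hI hR _
    refine ⟨hI, rfl, ?_⟩
    intro x y
    simp only [List.foldl_nil]
    rw [hR x y]
    exact pvConn_congr (by simp)
  | cons e E' ih =>
    intro p S hI hR hrange
    have hstep := dsuUnion_repr p S e.1 e.2 hI (hrange e (by simp)).1 (hrange e (by simp)).2 hR
    have hrest := ih (dsuUnion p e.1 e.2) _ hstep.1 hstep.2.2
      (fun e' he' => by rw [hstep.2.1]; exact hrange e' (List.mem_cons_of_mem _ he'))
    simp only [List.foldl_cons]
    refine ⟨hrest.1, by rw [hrest.2.1, hstep.2.1], ?_⟩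
    intro x y
    rw [hrest.2.2 x y]
    apply pvConn_congr
    intro u v
    constructor
    · rintro ((h | ⟨rfl, rfl⟩) | h)
      · exact Or.inl h
      · exact Or.inr (by simp)
      · exact Or.inr (List.mem_cons_of_mem _ h)
    · rintro (h | h)
      · exact Or.inl (Or.inl h)
      · rcases List.mem_cons.1 h with h' | h'
        · exact Or.inl (Or.inr (by rw [Prod.ext_iff] at h'; exact h'))
        · exact Or.inr h'


theorem pvEncInj {H i1 j1 i2 j2 : Nat} (h1 : j1 < H) (h2 : j2 < H)
    (h : i1 * H + j1 = i2 * H + j2) : i1 = i2 ∧ j1 = j2 := by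
  have hm : (i1 * H + j1) % H = (i2 * H + j2) % H := by rw [h]
  rw [Nat.mul_add_mod', Nat.mul_add_mod', Nat.mod_eq_of_lt h1, Nat.mod_eq_of_lt h2] at hm
  subst hm
  have : i1 * H = i2 * H := by omega
  have hH : 0 < H := by omega
  exact ⟨Nat.eq_of_mul_eq_mul_right hH this, rfl⟩

theorem pvEncLt {W H i j : Nat} (hi : i < W) (hj : j < H) : i * H + j < W * H := by
  calc i * H + j < i * H + H := by omega
    _ = (i + 1) * H := by ring
    _ ≤ W * H := Nat.mul_le_mul_right H hi

theorem pvEdgeMem (W H : Nat) (wall : PySem.Set Int) (a b : Nat) :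
    (a, b) ∈ pvEdgesB W H wall ↔
      ∃ i j, i < W ∧ j < H ∧ a = i * H + j ∧ PySem.Set.contains wall (a : Int) = false ∧
        ((i + 1 < W ∧ PySem.Set.contains wall ((a + H : Nat) : Int) = false ∧ b = a + H)
        ∨ (j + 1 < H ∧ PySem.Set.contains wall ((a + 1 : Nat) : Int) = false ∧ b = a + 1)
        ∨ ((i = 0 ∨ i = W - 1 ∨ j = 0 ∨ j = H - 1) ∧ b = W * H)) := by
  unfold pvEdgesB
  simp only [List.mem_flatMap, List.mem_range]
  constructor
  · rintro ⟨i, hi, j, hj, hmem⟩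
    refine ⟨i, j, hi, hj, ?_⟩
    simp only [List.mem_append, List.mem_ite_nil_right, List.mem_ite_nil_left,
      List.mem_singleton, Prod.mk.injEq, Bool.not_eq_true] at hmem
    obtain ⟨hw, hc⟩ := hmem
    rcases hc with ⟨⟨hcond, ha, hb⟩ | ⟨hcond, ha, hb⟩⟩ | ⟨hcond, ha, hb⟩
    · subst ha; exact ⟨rfl, hw, Or.inl ⟨hcond.1, hcond.2, hb⟩⟩
    · subst ha; exact ⟨rfl, hw, Or.inr (Or.inl ⟨hcond.1, hcond.2, hb⟩)⟩
    · subst ha; exact ⟨rfl, hw, Or.inr (Or.inr ⟨hcond, hb⟩)⟩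
  · rintro ⟨i, j, hi, hj, rfl, hw, hcase⟩
    refine ⟨i, hi, j, hj, ?_⟩
    simp only [List.mem_append, List.mem_ite_nil_right, List.mem_ite_nil_left,
      List.mem_singleton, Prod.mk.injEq, Bool.not_eq_true]
    refine ⟨hw, ?_⟩
    tauto

theorem pvEdgeBound (W H : Nat) (wall : PySem.Set Int) (e : Nat × Nat)
    (he : e ∈ pvEdgesB W H wall) : e.1 < W * H + 1 ∧ e.2 < W * H + 1 := by
  obtain ⟨a, b⟩ := e
  rcases (pvEdgeMem W H wall a b).1 he with ⟨i, j, hi, hj, rfl, -, hc⟩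
  have hlt := pvEncLt hi hj
  rcases hc with ⟨h1, -, rfl⟩ | ⟨h1, -, rfl⟩ | ⟨-, rfl⟩
  · have : (i + 1) * H + j < W * H := pvEncLt h1 hj
    constructor
    · omega
    · have : i * H + j + H = (i + 1) * H + j := by ring
      omega
  · omega
  · omega

theorem pvGetD_mem_or {α : Type} (xs : List α) (i : Int) (d : α) :
    PySem.List.pyGetD xs i d = d ∨ PySem.List.pyGetD xs i d ∈ xs := by
  by_cases h : PySem.Raise.InRange xs.length i
  · exact Or.inr (PySem.List.pyGetD_mem xs d h)
  · exact Or.inl (PySem.List.pyGetD_of_none xs i d ((PySem.List.pyGet?_eq_none_iff _ _).2 h))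

theorem pvGet2_vis0 {W H : Int} (a b : Int) :
    pvGet2 ((PySem.List.pyRange 0 W 1).map (fun _ => List.replicate H.toNat false)) a b false = false := by
  unfold pvGet2
  rcases pvGetD_mem_or ((PySem.List.pyRange 0 W 1).map (fun _ => List.replicate H.toNat false)) a [] with h | h
  · rw [h]
    rcases pvGetD_mem_or ([] : List Bool) b false with h2 | h2
    · exact h2
    · simp at h2
  · rcases List.mem_map.1 h with ⟨i, _, hrow⟩
    rw [← hrow]
    rcases pvGetD_mem_or (List.replicate H.toNat false) b false with h2 | h2
    · exact h2
    · exact List.eq_of_mem_replicate h2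

theorem pvGet2_grid0 {W H : Int} (a b : Int) :
    pvGet2 ((PySem.List.pyRange 0 W 1).map (fun _ => List.replicate H.toNat (0 : Int))) a b 0 = 0 := by
  unfold pvGet2
  rcases pvGetD_mem_or ((PySem.List.pyRange 0 W 1).map (fun _ => List.replicate H.toNat (0 : Int))) a [] with h | h
  · rw [h]
    rcases pvGetD_mem_or ([] : List Int) b 0 with h2 | h2
    · exact h2
    · simp at h2
  · rcases List.mem_map.1 h with ⟨i, _, hrow⟩
    rw [← hrow]
    rcases pvGetD_mem_or (List.replicate H.toNat (0 : Int)) b 0 with h2 | h2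
    · exact h2
    · exact List.eq_of_mem_replicate h2

theorem pvGet2_pvSet2 {α : Type} {g : List (List α)} {x y : Int} (v d : α)
    (hx0 : 0 ≤ x) (hx : x.toNat < g.length) (hy0 : 0 ≤ y)
    (hy : y.toNat < (g[x.toNat]'hx).length)
    (a b : Int) (ha0 : 0 ≤ a) (hb0 : 0 ≤ b) :
    pvGet2 (pvSet2 g x y v) a b d = if a = x ∧ b = y then v else pvGet2 g a b d := by
  have hxI : x < (g.length : Int) := by omega
  have hrow : PySem.List.pyGetD g x [] = g[x.toNat] :=
    PySem.List.pyGetD_eq_getElem g [] hx0 hxI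
  unfold pvSet2 pvGet2
  rw [hrow, PySem.List.pySetD_of_nonneg _ _ hy0, PySem.List.pySetD_of_nonneg _ _ hx0]
  by_cases haI : a < (g.length : Int)
  · have hga : PySem.List.pyGetD (g.set x.toNat ((g[x.toNat]'hx).set y.toNat v)) a [] =
        (g.set x.toNat ((g[x.toNat]'hx).set y.toNat v))[a.toNat]'(by simpa using (by omega : a.toNat < g.length)) :=
      PySem.List.pyGetD_eq_getElem _ [] ha0 (by simpa using haI)
    rw [hga, PySem.List.pyGetD_eq_getElem g [] ha0 haI]
    by_cases hax : a = x
    · subst hax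
      rw [List.getElem_set_self]
      by_cases hby : b = y
      · subst hby
        have hbI : b < (((g[a.toNat]'hx).set b.toNat v).length : Int) := by
          simp; omega
        rw [PySem.List.pyGetD_eq_getElem _ d hb0 hbI, List.getElem_set_self]
        simp
      · have hlen : ((g[a.toNat]'hx).set y.toNat v).length = (g[a.toNat]'hx).length := by simp
        by_cases hbI : b < ((g[a.toNat]'hx).length : Int)
        · rw [PySem.List.pyGetD_eq_getElem _ d hb0 (by rw [hlen]; exact_mod_cast hbI),
            PySem.List.pyGetD_eq_getElem _ d hb0 hbI]
          rw [List.getElem_set_ne (by omega)]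
          simp [hby]
        · have h1 : ¬ PySem.Raise.InRange ((g[a.toNat]'hx).set y.toNat v).length b := by
            rw [PySem.Raise.InRange]; omega
          have h2 : ¬ PySem.Raise.InRange (g[a.toNat]'hx).length b := by
            rw [PySem.Raise.InRange]; omega
          rw [PySem.List.pyGetD_of_none _ _ _ ((PySem.List.pyGet?_eq_none_iff _ _).2 h1),
            PySem.List.pyGetD_of_none _ _ _ ((PySem.List.pyGet?_eq_none_iff _ _).2 h2)]
          simp [hby]
    · rw [List.getElem_set_ne (by omega)]
      simp [hax]
  · have hlen : (g.set x.toNat ((g[x.toNat]'hx).set y.toNat v)).length = g.length := by simp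
    have h1 : ¬ PySem.Raise.InRange (g.set x.toNat ((g[x.toNat]'hx).set y.toNat v)).length a := by
      rw [PySem.Raise.InRange, hlen]; omega
    have h2 : ¬ PySem.Raise.InRange g.length a := by
      rw [PySem.Raise.InRange]; omega
    rw [PySem.List.pyGetD_of_none _ _ _ ((PySem.List.pyGet?_eq_none_iff _ _).2 h1),
      PySem.List.pyGetD_of_none _ _ _ ((PySem.List.pyGet?_eq_none_iff _ _).2 h2)]
    have : ¬ (a = x ∧ b = y) := by
      rintro ⟨rfl, -⟩; omega
    simp [this]

def pvOkG (W H : Int) (grid : List (List Int)) (c : Int × Int) : Prop :=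
  0 ≤ c.1 ∧ c.1 < W ∧ 0 ≤ c.2 ∧ c.2 < H ∧ pvGet2 grid c.1 c.2 0 ≠ 1

def pvOkW (W H : Int) (wall : List (Int × Int)) (c : Int × Int) : Prop :=
  0 ≤ c.1 ∧ c.1 < W ∧ 0 ≤ c.2 ∧ c.2 < H ∧ c ∉ wall

def pvVis (vis : List (List Bool)) (c : Int × Int) : Prop :=
  0 ≤ c.1 ∧ 0 ≤ c.2 ∧ pvGet2 vis c.1 c.2 false = true

theorem pvVis_pvSet2_iff {W H : Int} {vis : List (List Bool)} {c : Int × Int}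
    (hd : pvDims vis W.toNat H.toNat) (h : 0 ≤ c.1 ∧ c.1 < W ∧ 0 ≤ c.2 ∧ c.2 < H) (a : Int × Int) :
    pvVis (pvSet2 vis c.1 c.2 true) a ↔ (a = c ∨ pvVis vis a) := by
  have hx : c.1.toNat < vis.length := by have := hd.1; omega
  have hrowlen : (vis[c.1.toNat]'hx).length = H.toNat := hd.2 _ (List.getElem_mem hx)
  have hy : c.2.toNat < (vis[c.1.toNat]'hx).length := by omega
  constructor
  · rintro ⟨ha1, ha2, hget⟩
    rw [pvGet2_pvSet2 true false h.1 hx h.2.2.1 hy a.1 a.2 ha1 ha2] at hget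
    split_ifs at hget with hc
    · left; exact Prod.ext hc.1 hc.2
    · right; exact ⟨ha1, ha2, hget⟩
  · rintro (rfl | ⟨ha1, ha2, hget⟩)
    · refine ⟨h.1, h.2.2.1, ?_⟩
      rw [pvGet2_pvSet2 true false h.1 hx h.2.2.1 hy a.1 a.2 h.1 h.2.2.1]
      simp
    · refine ⟨ha1, ha2, ?_⟩
      rw [pvGet2_pvSet2 true false h.1 hx h.2.2.1 hy a.1 a.2 ha1 ha2]
      split_ifs with hc
      · rfl
      · exact hget

theorem pvBfs_mono (W H : Int) (grid : List (List Int)) (vis : List (List Bool))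
    (q : List (Int × Int)) (hd : pvDims vis W.toNat H.toNat) :
    ∀ c, pvVis vis c → pvVis (pvBfs W H grid vis q hd) c := by
  induction vis, q, hd using pvBfs.induct W H grid with
  | case1 vis hd _ => intro c hc; rw [pvBfs]; exact hc
  | case2 vis c rest hd h1 h2 _ ih =>
    intro a ha; rw [pvBfs, dif_pos h1, if_pos h2]; exact ih a ha
  | case3 vis c rest hd h1 h2 _ ih =>
    intro a ha; rw [pvBfs, dif_pos h1, if_neg h2]
    exact ih a ((pvVis_pvSet2_iff ‹pvDims vis W.toNat H.toNat› h1 a).2 (Or.inr ha))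
  | case4 vis c rest hd h1 _ ih =>
    intro a ha; rw [pvBfs, dif_neg h1]; exact ih a ha

theorem pvBfs_seed (W H : Int) (grid : List (List Int)) (vis : List (List Bool))
    (q : List (Int × Int)) (hd : pvDims vis W.toNat H.toNat) :
    ∀ c ∈ q, pvOkG W H grid c → pvVis (pvBfs W H grid vis q hd) c := by
  induction vis, q, hd using pvBfs.induct W H grid with
  | case1 vis hd _ => intro c hc; simp at hc
  | case2 vis c rest hd h1 h2 _ ih =>
    intro a ha hok; rw [pvBfs, dif_pos h1, if_pos h2]
    rcases List.mem_cons.1 ha with rfl | ha'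
    · rcases h2 with h2 | h2
      · exact pvBfs_mono W H grid vis rest _ a ⟨hok.1, hok.2.2.1, h2⟩
      · exact absurd h2 hok.2.2.2.2
    · exact ih a ha' hok
  | case3 vis c rest hd h1 h2 hdp ih =>
    intro a ha hok; rw [pvBfs, dif_pos h1, if_neg h2]
    rcases List.mem_cons.1 ha with rfl | ha'
    · apply pvBfs_mono
      exact (pvVis_pvSet2_iff ‹pvDims vis W.toNat H.toNat› h1 a).2 (Or.inl rfl)
    · exact ih a (List.mem_append_left _ ha') hok
  | case4 vis c rest hd h1 _ ih =>
    intro a ha hok; rw [pvBfs, dif_neg h1]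
    rcases List.mem_cons.1 ha with rfl | ha'
    · exact absurd ⟨hok.1, hok.2.1, hok.2.2.1, hok.2.2.2.1⟩ h1
    · exact ih a ha' hok

def pvInv (W H : Int) (grid : List (List Int)) (vis : List (List Bool)) (q : List (Int × Int)) : Prop :=
  (∀ c, pvVis vis c → pvOkG W H grid c) ∧
  (∀ c, pvVis vis c → ∀ d ∈ pvNbrs c, pvOkG W H grid d → pvVis vis d ∨ d ∈ q)

theorem pvInv_step_skip {W H : Int} {grid : List (List Int)} {vis : List (List Bool)}
    {c : Int × Int} {rest : List (Int × Int)}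
    (hI : pvInv W H grid vis (c :: rest))
    (hc : pvVis vis c ∨ ¬ pvOkG W H grid c) :
    pvInv W H grid vis rest := by
  refine ⟨hI.1, ?_⟩
  intro a ha d hd hok
  rcases hI.2 a ha d hd hok with h | h
  · exact Or.inl h
  · rcases List.mem_cons.1 h with rfl | h'
    · rcases hc with hv | hno
      · exact Or.inl hv
      · exact absurd hok hno
    · exact Or.inr h'

theorem pvInv_step_mark {W H : Int} {grid : List (List Int)} {vis : List (List Bool)}
    {c : Int × Int} {rest : List (Int × Int)}
    (hd : pvDims vis W.toNat H.toNat)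
    (hI : pvInv W H grid vis (c :: rest))
    (h1 : 0 ≤ c.1 ∧ c.1 < W ∧ 0 ≤ c.2 ∧ c.2 < H)
    (h2 : ¬(pvGet2 vis c.1 c.2 false = true ∨ pvGet2 grid c.1 c.2 0 = 1)) :
    pvInv W H grid (pvSet2 vis c.1 c.2 true) (rest ++ pvNbrs c) := by
  have hokc : pvOkG W H grid c := ⟨h1.1, h1.2.1, h1.2.2.1, h1.2.2.2, fun hw => h2 (Or.inr hw)⟩
  constructor
  · intro a ha
    rcases (pvVis_pvSet2_iff hd h1 a).1 ha with rfl | hv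
    · exact hokc
    · exact hI.1 a hv
  · intro a ha d hd' hok
    rcases (pvVis_pvSet2_iff hd h1 a).1 ha with rfl | hv
    · exact Or.inr (List.mem_append_right _ hd')
    · rcases hI.2 a hv d hd' hok with h | h
      · exact Or.inl ((pvVis_pvSet2_iff hd h1 d).2 (Or.inr h))
      · rcases List.mem_cons.1 h with rfl | h'
        · exact Or.inl ((pvVis_pvSet2_iff hd h1 d).2 (Or.inl rfl))
        · exact Or.inr (List.mem_append_left _ h')

theorem pvBfs_inv (W H : Int) (grid : List (List Int)) (vis : List (List Bool))
    (q : List (Int × Int)) (hd : pvDims vis W.toNat H.toNat)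
    (hI : pvInv W H grid vis q) :
    (∀ c, pvVis (pvBfs W H grid vis q hd) c → pvOkG W H grid c) ∧
    (∀ c, pvVis (pvBfs W H grid vis q hd) c →
      ∀ d ∈ pvNbrs c, pvOkG W H grid d → pvVis (pvBfs W H grid vis q hd) d) := by
  induction vis, q, hd using pvBfs.induct W H grid with
  | case1 vis hd _ =>
    rw [pvBfs]
    refine ⟨hI.1, ?_⟩
    intro c hc d hd' hok
    rcases hI.2 c hc d hd' hok with h | h
    · exact h
    · simp at h
  | case2 vis c rest hd h1 h2 _ ih =>
    rw [pvBfs, dif_pos h1, if_pos h2]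
    apply ih
    rcases h2 with h2 | h2
    · exact pvInv_step_skip hI (Or.inl ⟨h1.1, h1.2.2.1, h2⟩)
    · exact pvInv_step_skip hI (Or.inr (fun hok => hok.2.2.2.2 h2))
  | case3 vis c rest hd h1 h2 hdp ih =>
    rw [pvBfs, dif_pos h1, if_neg h2]
    exact ih (pvInv_step_mark ‹pvDims vis W.toNat H.toNat› hI h1 h2)
  | case4 vis c rest hd h1 _ ih =>
    rw [pvBfs, dif_neg h1]
    apply ih
    exact pvInv_step_skip hI (Or.inr (fun hok => h1 ⟨hok.1, hok.2.1, hok.2.2.1, hok.2.2.2.1⟩))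

theorem pvBfs_min (W H : Int) (grid : List (List Int)) (vis : List (List Bool))
    (q : List (Int × Int)) (hd : pvDims vis W.toNat H.toNat) (T : Int × Int → Prop)
    (hvis : ∀ c, pvVis vis c → T c)
    (hq : ∀ c ∈ q, pvOkG W H grid c → T c)
    (hT : ∀ c, T c → ∀ d ∈ pvNbrs c, pvOkG W H grid d → T d) :
    ∀ c, pvVis (pvBfs W H grid vis q hd) c → T c := by
  induction vis, q, hd using pvBfs.induct W H grid with
  | case1 vis hd _ => rw [pvBfs]; exact hvis
  | case2 vis c rest hd h1 h2 _ ih =>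
    rw [pvBfs, dif_pos h1, if_pos h2]
    exact ih hvis (fun a ha => hq a (List.mem_cons_of_mem _ ha)) 
  | case3 vis c rest hd h1 h2 hdp ih =>
    rw [pvBfs, dif_pos h1, if_neg h2]
    have hokc : pvOkG W H grid c := ⟨h1.1, h1.2.1, h1.2.2.1, h1.2.2.2, fun hw => h2 (Or.inr hw)⟩
    have hTc : T c := hq c List.mem_cons_self hokc
    apply ih
    · intro a ha
      rcases (pvVis_pvSet2_iff ‹pvDims vis W.toNat H.toNat› h1 a).1 ha with rfl | hv
      · exact hTc
      · exact hvis a hv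
    · intro a ha hok
      rcases List.mem_append.1 ha with ha' | ha'
      · exact hq a (List.mem_cons_of_mem _ ha') hok
      · exact hT c hTc a ha' hok
  | case4 vis c rest hd h1 _ ih =>
    rw [pvBfs, dif_neg h1]
    exact ih hvis (fun a ha => hq a (List.mem_cons_of_mem _ ha))

theorem pvEnumDict (xs : List Int) (hnd : xs.Nodup) : ∀ (s : Int) (d : PySem.Dict Int Int) (x : Int),
    ((PySem.List.enumerate xs s).foldl (fun d p => d.insert p.2 p.1) d).getD x 0
      = if x ∈ xs then s + (xs.idxOf x : Int) else d.getD x 0 := by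
  induction xs with
  | nil => intro s d x; simp [PySem.List.enumerate_nil]
  | cons a t ih =>
    intro s d x
    rw [PySem.List.enumerate_cons]
    simp only [List.foldl_cons]
    rw [ih (List.nodup_cons.1 hnd).2 (s + 1) (d.insert a s) x]
    by_cases hx : x ∈ t
    · have hxa : a ≠ x := fun h => (List.nodup_cons.1 hnd).1 (h ▸ hx)
      rw [if_pos hx, if_pos (List.mem_cons_of_mem _ hx), List.idxOf_cons_ne t hxa]
      push_cast
      ring
    · rw [if_neg hx]
      by_cases hxa : x = a
      · subst hxa
        rw [if_pos List.mem_cons_self, PySem.Dict.getD_insert, if_pos rfl, List.idxOf_cons_self]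
        simp
      · rw [if_neg (by simp [hxa, hx]), PySem.Dict.getD_insert, if_neg hxa]

theorem pvXs_nodup (b : List (Int × Int)) : (pvXs b).Nodup := by
  unfold pvXs
  exact ((PySem.List.sorted_perm _ _ _).nodup_iff).2 (PySem.Set.nodup_ofList _)

theorem pvYs_nodup (b : List (Int × Int)) : (pvYs b).Nodup := by
  unfold pvYs
  exact ((PySem.List.sorted_perm _ _ _).nodup_iff).2 (PySem.Set.nodup_ofList _)

theorem pvMemXs {b : List (Int × Int)} {p : Int × Int} (h : p ∈ b) : p.1 ∈ pvXs b := by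
  unfold pvXs
  rw [PySem.List.mem_sorted, PySem.Set.mem_ofList]
  exact List.mem_map_of_mem h

theorem pvMemYs {b : List (Int × Int)} {p : Int × Int} (h : p ∈ b) : p.2 ∈ pvYs b := by
  unfold pvYs
  rw [PySem.List.mem_sorted, PySem.Set.mem_ofList]
  exact List.mem_map_of_mem h

theorem pvGrid_char (xs ys : List Int) (l : List (Int × Int)) :
    ∀ (g : List (List Int)), pvDims g xs.length ys.length →
    (∀ p ∈ l, p.1 ∈ xs ∧ p.2 ∈ ys) →
    ∀ (a b : Int), 0 ≤ a → 0 ≤ b →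
    (pvGet2 (l.foldl (fun g p => pvSet2 g ((xs.idxOf p.1 : Int)) ((ys.idxOf p.2 : Int)) 1) g) a b 0 = 1
      ↔ ((∃ p ∈ l, ((xs.idxOf p.1 : Int), (ys.idxOf p.2 : Int)) = (a, b)) ∨ pvGet2 g a b 0 = 1)) := by
  induction l with
  | nil =>
    intro g hg hl a b ha hb
    simp
  | cons p t ih =>
    intro g hg hl a b ha hb
    have hpx : p.1 ∈ xs := (hl p List.mem_cons_self).1
    have hpy : p.2 ∈ ys := (hl p List.mem_cons_self).2
    have hxi : ((xs.idxOf p.1 : Int)).toNat < g.length := by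
      have := List.idxOf_lt_length_of_mem hpx
      have := hg.1
      simp
      omega
    have hrowlen : (g[((xs.idxOf p.1 : Int)).toNat]'hxi).length = ys.length :=
      hg.2 _ (List.getElem_mem hxi)
    have hyi : ((ys.idxOf p.2 : Int)).toNat < (g[((xs.idxOf p.1 : Int)).toNat]'hxi).length := by
      rw [hrowlen]
      simpa using List.idxOf_lt_length_of_mem hpy
    simp only [List.foldl_cons]
    rw [ih (pvSet2 g _ _ 1)
      (pvDims_pvSet2 hg (by positivity) (by simpa using hxi))
      (fun q hq => hl q (List.mem_cons_of_mem _ hq)) a b ha hb]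
    rw [pvGet2_pvSet2 1 0 (by positivity) hxi (by positivity) hyi a b ha hb]
    rw [List.exists_mem_cons_iff]
    by_cases hc : a = (xs.idxOf p.1 : Int) ∧ b = (ys.idxOf p.2 : Int)
    · rw [if_pos hc]
      constructor
      · intro _; exact Or.inl (Or.inl (by rw [hc.1, hc.2]))
      · intro _; exact Or.inr rfl
    · rw [if_neg hc]
      constructor
      · rintro (h | h)
        · exact Or.inl (Or.inr h)
        · exact Or.inr h
      · rintro ((h | h) | h)
        · exfalso
          apply hc
          rw [Prod.mk.injEq] at h
          exact ⟨h.1.symm, h.2.symm⟩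
        · exact Or.inl h
        · exact Or.inr h

theorem pvFoldlPairs (l : List Int) (f g : Int → Int × Int) :
    ∀ init : List (Int × Int), l.foldl (fun q i => q ++ [f i, g i]) init
      = init ++ l.flatMap (fun i => [f i, g i]) := by
  induction l with
  | nil => intro init; simp
  | cons a t ih =>
    intro init
    simp only [List.foldl_cons, List.flatMap_cons, ih]
    simp

theorem pvFoldlUpdate {α : Type} (l : List α) (L : α → List (Int × Int)) :
    ∀ s : PySem.Set (Int × Int), l.foldl (fun s i => PySem.Set.update s (L i)) s
      = PySem.Set.update s (l.flatMap L) := by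
  induction l with
  | nil => intro s; rfl
  | cons a t ih =>
    intro s
    simp only [List.foldl_cons, List.flatMap_cons, ih, PySem.Set.update_append]

theorem pvNotMemBool (s : PySem.Set (Int × Int)) (x : Int × Int) :
    decide (x ∉ s) = !(PySem.Set.contains s x) := by
  by_cases h : x ∈ s <;> simp [h]

theorem pvModLt (a n : Int) (h0 : 0 ≤ a) (h : a < n) : PySem.Int.mod a n = a := by
  show a.fmod n = a
  rw [Int.fmod_eq_emod, if_pos (Or.inl (by omega : (0:Int) ≤ n))]
  rw [Int.emod_eq_of_lt h0 h]
  ring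

theorem pvModSelf (n : Int) : PySem.Int.mod n n = 0 := by
  show n.fmod n = 0
  exact Int.fmod_self

theorem pvEdges (pts : List (Int × Int)) :
    pts.zip (PySem.List.slice pts (some 1) none ++ PySem.List.slice pts none (some 1))
      = (PySem.List.pyRange 0 (pts.length : Int) 1).map (fun i =>
          (PySem.List.pyGetD pts i (0, 0),
           PySem.List.pyGetD pts (PySem.Int.mod (i + 1) (pts.length : Int)) (0, 0))) := by
  rw [PySem.List.slice_from pts (by norm_num), PySem.List.slice_to pts (by norm_num)]
  simp only [Int.toNat_one]
  apply List.ext_getElem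
  · simp [PySem.List.length_pyRange_one]
    omega
  · intro k hk1 hk2
    have hlen : k < pts.length := by
      simp at hk1
      omega
    rw [List.getElem_zip, List.getElem_map, PySem.List.getElem_pyRange_one]
    have hr : (0 : Int) + (k : Int) = ((k : Nat) : Int) := by omega
    rw [hr, PySem.List.pyGetD_eq_getElem pts (0,0) (by positivity) (by exact_mod_cast hlen)]
    simp only [Int.toNat_natCast]
    rw [List.getElem_append]
    by_cases hlast : k + 1 < pts.length
    · have hdl : k < (pts.drop 1).length := by simp; omega
      rw [dif_pos hdl, List.getElem_drop]
      have hmod : PySem.Int.mod (((k : Nat) : Int) + 1) (pts.length : Int) = (((k + 1 : Nat)) : Int) := by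
        rw [show ((k : Nat) : Int) + 1 = (((k + 1 : Nat)) : Int) by push_cast; ring]
        exact pvModLt _ _ (by positivity) (by exact_mod_cast hlast)
      rw [hmod, PySem.List.pyGetD_eq_getElem pts (0,0) (by positivity) (by exact_mod_cast hlast)]
      have h1k : 1 + k = k + 1 := by omega
      simp [h1k]
    · have hklen : k + 1 = pts.length := by omega
      have hdl : ¬ k < (pts.drop 1).length := by simp; omega
      rw [dif_neg hdl]
      have hmod : PySem.Int.mod (((k : Nat) : Int) + 1) (pts.length : Int) = 0 := by
        rw [show ((k : Nat) : Int) + 1 = (pts.length : Int) by omega]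
        exact pvModSelf _
      rw [hmod, PySem.List.pyGetD_eq_getElem pts (0,0) (by norm_num) (by exact_mod_cast (by omega : 0 < pts.length))]
      have hidx : k - (pts.length - 1) = 0 := by omega
      simp [hidx]

theorem pvGreenEq (pts : List (Int × Int)) (red : PySem.Set (Int × Int)) :
    (PySem.List.pyRange 0 (pts.length : Int) 1).foldl (fun green i =>
      let p1 := PySem.List.pyGetD pts i (0, 0)
      let p2 := PySem.List.pyGetD pts (PySem.Int.mod (i + 1) (pts.length : Int)) (0, 0)
      if p1.1 = p2.1 then
        (PySem.List.pyRange (min p1.2 p2.2) (max p1.2 p2.2 + 1) 1).foldl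
          (fun green y => if (p1.1, y) ∉ red then PySem.Set.add green (p1.1, y) else green) green
      else
        (PySem.List.pyRange (min p1.1 p2.1) (max p1.1 p2.1 + 1) 1).foldl
          (fun green x => if (x, p1.2) ∉ red then PySem.Set.add green (x, p1.2) else green) green)
      PySem.Set.empty
    = (pts.zip (PySem.List.slice pts (some 1) none ++ PySem.List.slice pts none (some 1))).foldl
        (fun green e =>
          if e.1.1 = e.2.1 then
            PySem.Set.update green
              (((PySem.List.pyRange (min e.1.2 e.2.2) (max e.1.2 e.2.2 + 1) 1).filter
                (fun y => !(PySem.Set.contains red (e.1.1, y)))).map (fun y => (e.1.1, y)))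
          else
            PySem.Set.update green
              (((PySem.List.pyRange (min e.1.1 e.2.1) (max e.1.1 e.2.1 + 1) 1).filter
                (fun x => !(PySem.Set.contains red (x, e.1.2)))).map (fun x => (x, e.1.2))))
        PySem.Set.empty := by
  rw [pvEdges, List.foldl_map]
  apply PySem.List.foldl_congr_mem
  intro acc i _
  generalize PySem.List.pyGetD pts i (0, 0) = p1
  generalize PySem.List.pyGetD pts (PySem.Int.mod (i + 1) (pts.length : Int)) (0, 0) = p2
  show _ = _
  by_cases hx : p1.1 = p2.1
  · simp only [if_pos hx]
    rw [PySem.List.foldl_ite_eq_foldl_filter (fun y => (p1.1, y) ∉ red)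
      (fun green y => PySem.Set.add green (p1.1, y)),
      PySem.Set.update_map_eq_foldl_add]
    rw [List.filter_congr (fun y _ => pvNotMemBool red (p1.1, y))]
  · simp only [if_neg hx]
    rw [PySem.List.foldl_ite_eq_foldl_filter (fun x => (x, p1.2) ∉ red)
      (fun green x => PySem.Set.add green (x, p1.2)),
      PySem.Set.update_map_eq_foldl_add]
    rw [List.filter_congr (fun x _ => pvNotMemBool red (x, p1.2))]

theorem pvDims_grid0 (W H : Int) :
    pvDims ((PySem.List.pyRange 0 W 1).map (fun _ => List.replicate H.toNat (0 : Int))) W.toNat H.toNat := by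
  constructor
  · simp [PySem.List.length_pyRange_one]
  · intro r hr
    rcases List.mem_map.1 hr with ⟨i, _, rfl⟩
    exact List.length_replicate

theorem pvSeeds_mem (W H : Int) (c : Int × Int) :
    c ∈ (PySem.List.pyRange 0 H 1).foldl (fun q j => q ++ [((0 : Int), j), (W - 1, j)])
        ((PySem.List.pyRange 0 W 1).foldl (fun q i => q ++ [(i, (0 : Int)), (i, H - 1)]) ([] : List (Int × Int)))
      ↔ ((∃ i, (0 ≤ i ∧ i < W) ∧ (c = (i, 0) ∨ c = (i, H - 1))) ∨
         (∃ j, (0 ≤ j ∧ j < H) ∧ (c = (0, j) ∨ c = (W - 1, j)))) := by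
  rw [pvFoldlPairs (PySem.List.pyRange 0 W 1) (fun i => (i, (0 : Int))) (fun i => (i, H - 1)),
    pvFoldlPairs (PySem.List.pyRange 0 H 1) (fun j => ((0 : Int), j)) (fun j => (W - 1, j))]
  simp only [List.nil_append, List.mem_append, List.mem_flatMap, PySem.List.mem_pyRange_one,
    List.mem_cons, List.not_mem_nil, or_false]

theorem pvAllowedEq (W H : Int) (xs ys : List Int) (vis : List (List Bool))
    (al0 : PySem.Set (Int × Int)) :
    (PySem.List.pyRange 0 W 1).foldl (fun al x =>
      (PySem.List.pyRange 0 H 1).foldl (fun al y =>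
        if ¬ (pvGet2 vis x y false = true) then
          PySem.Set.add al (PySem.List.pyGetD xs x 0, PySem.List.pyGetD ys y 0)
        else al) al) al0
      = PySem.Set.update al0 ((PySem.List.pyRange 0 W 1).flatMap (fun i =>
          ((PySem.List.pyRange 0 H 1).filter (fun j => !(pvGet2 vis i j false))).map
            (fun j => (PySem.List.pyGetD xs i 0, PySem.List.pyGetD ys j 0)))) := by
  rw [← pvFoldlUpdate]
  apply PySem.List.foldl_congr_mem
  intro al i _
  rw [PySem.List.foldl_ite_eq_foldl_filter (fun y => ¬ (pvGet2 vis i y false = true))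
    (fun al y => PySem.Set.add al (PySem.List.pyGetD xs i 0, PySem.List.pyGetD ys y 0)),
    PySem.Set.update_map_eq_foldl_add]
  congr 1
  apply List.filter_congr
  intro j _
  simp

def pvGreenA (pts : List (Int × Int)) (red : PySem.Set (Int × Int)) : PySem.Set (Int × Int) :=
  (PySem.List.pyRange 0 (pts.length : Int) 1).foldl (fun green i =>
    let p1 := PySem.List.pyGetD pts i (0, 0)
    let p2 := PySem.List.pyGetD pts (PySem.Int.mod (i + 1) (pts.length : Int)) (0, 0)
    if p1.1 = p2.1 then
      (PySem.List.pyRange (min p1.2 p2.2) (max p1.2 p2.2 + 1) 1).foldl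
        (fun green y => if (p1.1, y) ∉ red then PySem.Set.add green (p1.1, y) else green) green
    else
      (PySem.List.pyRange (min p1.1 p2.1) (max p1.1 p2.1 + 1) 1).foldl
        (fun green x => if (x, p1.2) ∉ red then PySem.Set.add green (x, p1.2) else green) green)
    PySem.Set.empty

def pvGreenB (pts : List (Int × Int)) (red : PySem.Set (Int × Int)) : PySem.Set (Int × Int) :=
  (pts.zip (PySem.List.slice pts (some 1) none ++ PySem.List.slice pts none (some 1))).foldl
    (fun green e =>
      if e.1.1 = e.2.1 then
        PySem.Set.update green
          (((PySem.List.pyRange (min e.1.2 e.2.2) (max e.1.2 e.2.2 + 1) 1).filter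
            (fun y => !(PySem.Set.contains red (e.1.1, y)))).map (fun y => (e.1.1, y)))
      else
        PySem.Set.update green
          (((PySem.List.pyRange (min e.1.1 e.2.1) (max e.1.1 e.2.1 + 1) 1).filter
            (fun x => !(PySem.Set.contains red (x, e.1.2)))).map (fun x => (x, e.1.2))))
    PySem.Set.empty

theorem pvGreenAB (pts : List (Int × Int)) (red : PySem.Set (Int × Int)) :
    pvGreenA pts red = pvGreenB pts red := pvGreenEq pts red

def pvStageA (bnd : PySem.Set (Int × Int)) : PySem.Set (Int × Int) :=
  let xs := pvXs bnd
  let ys := pvYs bnd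
  let x_index : PySem.Dict Int Int :=
    (PySem.List.enumerate xs 0).foldl (fun d p => d.insert p.2 p.1) PySem.Dict.empty
  let y_index : PySem.Dict Int Int :=
    (PySem.List.enumerate ys 0).foldl (fun d p => d.insert p.2 p.1) PySem.Dict.empty
  let W : Int := xs.length
  let H : Int := ys.length
  let grid : List (List Int) :=
    bnd.foldl (fun g p => pvSet2 g (x_index.getD p.1 0) (y_index.getD p.2 0) 1)
      ((PySem.List.pyRange 0 W 1).map (fun _ => List.replicate H.toNat 0))
  let vis0 : List (List Bool) := (PySem.List.pyRange 0 W 1).map (fun _ => List.replicate H.toNat false)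
  let q0 : List (Int × Int) := (PySem.List.pyRange 0 W 1).foldl (fun q i => q ++ [(i, 0), (i, H - 1)]) []
  let q1 : List (Int × Int) := (PySem.List.pyRange 0 H 1).foldl (fun q j => q ++ [(0, j), (W - 1, j)]) q0
  let visited := pvBfs W H grid vis0 q1 (pvDims_vis0 W H)
  let allowed0 : PySem.Set (Int × Int) := PySem.Set.ofList bnd
  (PySem.List.pyRange 0 W 1).foldl (fun al x =>
    (PySem.List.pyRange 0 H 1).foldl (fun al y =>
      if ¬ (pvGet2 visited x y false = true) then
        PySem.Set.add al (PySem.List.pyGetD xs x 0, PySem.List.pyGetD ys y 0)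
      else al) al) allowed0

def pvStageB (bnd : PySem.Set (Int × Int)) : PySem.Set (Int × Int) :=
  let xs := pvXs bnd
  let ys := pvYs bnd
  let x_index : PySem.Dict Int Int :=
    (PySem.List.enumerate xs 0).foldl (fun d p => d.insert p.2 p.1) PySem.Dict.empty
  let y_index : PySem.Dict Int Int :=
    (PySem.List.enumerate ys 0).foldl (fun d p => d.insert p.2 p.1) PySem.Dict.empty
  let W : Nat := xs.length
  let H : Nat := ys.length
  let wall : PySem.Set Int :=
    PySem.Set.ofList (bnd.map (fun p =>
      x_index.getD p.1 0 * (H : Int) + y_index.getD p.2 0))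
  let OUT : Nat := W * H
  let edges : List (Nat × Nat) := pvEdgesB W H wall
  let parent : List Nat := edges.foldl (fun p e => dsuUnion p e.1 e.2) (List.range (OUT + 1))
  let root_out : Nat := dsuRoot parent OUT
  PySem.Set.update (PySem.Set.ofList bnd)
    ((List.range W).flatMap (fun i =>
      ((List.range H).filter (fun j =>
          PySem.Set.contains wall ((i * H + j : Nat) : Int) || (dsuRoot parent (i * H + j) != root_out))).map
        (fun j => (xs.getD i 0, ys.getD j 0))))

theorem pvNbrs_symm (c d : Int × Int) (h : d ∈ pvNbrs c) : c ∈ pvNbrs d := by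
  obtain ⟨c1, c2⟩ := c; obtain ⟨d1, d2⟩ := d
  simp [pvNbrs, Prod.ext_iff] at h ⊢
  omega

theorem pvStageEq (bnd : PySem.Set (Int × Int)) : pvStageA bnd = pvStageB bnd := by
  simp only [pvStageA, pvStageB]
  set xs := pvXs bnd with hxs
  set ys := pvYs bnd with hys
  set W' : Nat := xs.length with hW'
  set H' : Nat := ys.length with hH'
  set W : Int := (W' : Int) with hW
  set H : Int := (H' : Int) with hH
  -- ===== A side: the grid marks exactly the (idxOf-encoded) boundary cells =====
  have hgx : ∀ p ∈ bnd, (((PySem.List.enumerate xs 0).foldl (fun d p => d.insert p.2 p.1)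
      PySem.Dict.empty).getD p.1 0) = ((xs.idxOf p.1 : Int)) := by
    intro p hp
    rw [pvEnumDict xs (pvXs_nodup bnd) 0 PySem.Dict.empty p.1, if_pos (pvMemXs hp)]
    ring
  have hgy : ∀ p ∈ bnd, (((PySem.List.enumerate ys 0).foldl (fun d p => d.insert p.2 p.1)
      PySem.Dict.empty).getD p.2 0) = ((ys.idxOf p.2 : Int)) := by
    intro p hp
    rw [pvEnumDict ys (pvYs_nodup bnd) 0 PySem.Dict.empty p.2, if_pos (pvMemYs hp)]
    ring
  have hgrid : bnd.foldl (fun g p => pvSet2 g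
        (((PySem.List.enumerate xs 0).foldl (fun d p => d.insert p.2 p.1) PySem.Dict.empty).getD p.1 0)
        (((PySem.List.enumerate ys 0).foldl (fun d p => d.insert p.2 p.1) PySem.Dict.empty).getD p.2 0) 1)
        ((PySem.List.pyRange 0 W 1).map (fun _ => List.replicate H.toNat (0 : Int)))
      = bnd.foldl (fun g p => pvSet2 g ((xs.idxOf p.1 : Int)) ((ys.idxOf p.2 : Int)) 1)
        ((PySem.List.pyRange 0 W 1).map (fun _ => List.replicate H.toNat (0 : Int))) :=
    PySem.List.foldl_congr_mem _ _ _ _ (fun acc p hp => by rw [hgx p hp, hgy p hp])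
  set grid := bnd.foldl (fun g p => pvSet2 g
        (((PySem.List.enumerate xs 0).foldl (fun d p => d.insert p.2 p.1) PySem.Dict.empty).getD p.1 0)
        (((PySem.List.enumerate ys 0).foldl (fun d p => d.insert p.2 p.1) PySem.Dict.empty).getD p.2 0) 1)
        ((PySem.List.pyRange 0 W 1).map (fun _ => List.replicate H.toNat (0 : Int))) with hgriddef0
  have hgriddef : grid = bnd.foldl (fun g p => pvSet2 g ((xs.idxOf p.1 : Int)) ((ys.idxOf p.2 : Int)) 1)
    ((PySem.List.pyRange 0 W 1).map (fun _ => List.replicate H.toNat (0 : Int))) := hgriddef0.trans hgrid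
  -- the boundary cells as compressed (Int × Int) pairs
  set wB : List (Int × Int) := bnd.map (fun p => ((xs.idxOf p.1 : Int), (ys.idxOf p.2 : Int))) with hwB
  have hl : ∀ p ∈ bnd, p.1 ∈ xs ∧ p.2 ∈ ys := fun p hp => ⟨pvMemXs hp, pvMemYs hp⟩
  have hdims : pvDims ((PySem.List.pyRange 0 W 1).map (fun _ => List.replicate H.toNat (0 : Int)))
      xs.length ys.length := by
    have h := pvDims_grid0 W H
    rw [hW, hH] at h ⊢
    simpa using h
  have hg1 : ∀ a b : Int, 0 ≤ a → 0 ≤ b → (pvGet2 grid a b 0 = 1 ↔ (a, b) ∈ wB) := by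
    intro a b ha hb
    have h0 : pvGet2 ((PySem.List.pyRange 0 W 1).map (fun _ => List.replicate H.toNat (0 : Int))) a b 0 = 0 :=
      pvGet2_grid0 a b
    rw [hgriddef, pvGrid_char xs ys bnd _ hdims hl a b ha hb, h0, hwB]
    simp [List.mem_map]
  have hok : ∀ c : Int × Int, pvOkG W H grid c ↔ pvOkW W H wB c := by
    intro c
    unfold pvOkG pvOkW
    constructor
    · rintro ⟨h1, h2, h3, h4, h5⟩
      exact ⟨h1, h2, h3, h4, fun hm => h5 ((hg1 c.1 c.2 h1 h3).2 hm)⟩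
    · rintro ⟨h1, h2, h3, h4, h5⟩
      exact ⟨h1, h2, h3, h4, fun hm => h5 ((hg1 c.1 c.2 h1 h3).1 hm)⟩
  -- ===== B side: the flat wall set describes the same cells =====
  set wallN : PySem.Set Int := PySem.Set.ofList (bnd.map (fun p =>
      ((PySem.List.enumerate xs 0).foldl (fun d p => d.insert p.2 p.1) PySem.Dict.empty).getD p.1 0 * ((H' : Nat) : Int) +
      ((PySem.List.enumerate ys 0).foldl (fun d p => d.insert p.2 p.1) PySem.Dict.empty).getD p.2 0)) with hwN
  have hwmapN : bnd.map (fun p =>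
      ((PySem.List.enumerate xs 0).foldl (fun d p => d.insert p.2 p.1) PySem.Dict.empty).getD p.1 0 * ((H' : Nat) : Int) +
      ((PySem.List.enumerate ys 0).foldl (fun d p => d.insert p.2 p.1) PySem.Dict.empty).getD p.2 0)
      = bnd.map (fun p => ((xs.idxOf p.1 * H' + ys.idxOf p.2 : Nat) : Int)) :=
    List.map_congr_left (fun p hp => by
      rw [hgx p hp, hgy p hp]
      push_cast
      ring)
  have hNmem : ∀ i j : Nat, j < H' → (PySem.Set.contains wallN ((i * H' + j : Nat) : Int) = true ↔
      ((i : Int), (j : Int)) ∈ wB) := by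
    intro i j hj
    rw [PySem.Set.contains_iff, hwN, PySem.Set.mem_ofList, hwmapN, hwB]
    simp only [List.mem_map]
    constructor
    · rintro ⟨p, hp, hpe⟩
      have hpe' : xs.idxOf p.1 * H' + ys.idxOf p.2 = i * H' + j := by exact_mod_cast hpe
      have hjx : ys.idxOf p.2 < H' := List.idxOf_lt_length_of_mem (pvMemYs hp)
      obtain ⟨he1, he2⟩ := pvEncInj hjx hj hpe'
      exact ⟨p, hp, by rw [he1, he2]⟩
    · rintro ⟨p, hp, hpe⟩
      rw [Prod.mk.injEq] at hpe
      refine ⟨p, hp, ?_⟩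
      have h1 : xs.idxOf p.1 = i := by exact_mod_cast hpe.1
      have h2 : ys.idxOf p.2 = j := by exact_mod_cast hpe.2
      rw [h1, h2]
  -- ===== the union-find structure represents connectivity of the cell graph =====
  set OUT : Nat := W' * H' with hOUT
  set Ed : List (Nat × Nat) := pvEdgesB W' H' wallN with hEd
  have hrange : ∀ e ∈ Ed, e.1 < (List.range (OUT + 1)).length ∧ e.2 < (List.range (OUT + 1)).length := by
    intro e he
    rw [List.length_range]
    exact pvEdgeBound W' H' wallN e he
  set parent : List Nat := Ed.foldl (fun p e => dsuUnion p e.1 e.2) (List.range (OUT + 1)) with hpar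
  set E : Nat → Nat → Prop := fun x y => (x, y) ∈ Ed with hE
  have hfold := dsuFold_repr Ed (List.range (OUT + 1)) (fun _ _ => False)
    (pvDsuInv_range _) (pvRepr_range _) hrange
  have hrepr : pvRepr parent E := by
    intro x y
    rw [hfold.2.2 x y]
    exact pvConn_congr (by simp [hE])
  set rootO : Nat := dsuRoot parent OUT with hrootO
  have hfind : ∀ c : Nat, (dsuRoot parent c = rootO ↔ pvConn E c OUT) := fun c => hrepr c OUT
  -- ===== A side BFS =====
  set vis0 := (PySem.List.pyRange 0 W 1).map (fun _ => List.replicate H.toNat false) with hvis0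
  set q1 := (PySem.List.pyRange 0 H 1).foldl (fun q j => q ++ [((0 : Int), j), (W - 1, j)])
    ((PySem.List.pyRange 0 W 1).foldl (fun q i => q ++ [(i, (0 : Int)), (i, H - 1)]) []) with hq1def
  set visited := pvBfs W H grid vis0 q1 (pvDims_vis0 W H) with hvisdef
  have hInv0 : pvInv W H grid vis0 q1 := by
    constructor
    · intro c hc
      exact absurd hc.2.2 (by rw [hvis0, pvGet2_vis0]; simp)
    · intro c hc
      exact absurd hc.2.2 (by rw [hvis0, pvGet2_vis0]; simp)
  have hVsub : ∀ c, pvVis visited c → pvOkG W H grid c :=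
    (pvBfs_inv W H grid vis0 q1 (pvDims_vis0 W H) hInv0).1
  have hVclo : ∀ c, pvVis visited c → ∀ d ∈ pvNbrs c, pvOkG W H grid d → pvVis visited d :=
    (pvBfs_inv W H grid vis0 q1 (pvDims_vis0 W H) hInv0).2
  have hVseed : ∀ c ∈ q1, pvOkG W H grid c → pvVis visited c :=
    pvBfs_seed W H grid vis0 q1 (pvDims_vis0 W H)
  -- ok-ness of an in-range non-wall cell, flat form, and its converse
  have hokflat : ∀ i j : Nat, i < W' → j < H' → PySem.Set.contains wallN ((i * H' + j : Nat) : Int) = false →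
      pvOkG W H grid ((i : Int), (j : Int)) := by
    intro i j hi hj hwf
    refine (hok _).2 ⟨by positivity, by show (i : Int) < W; rw [hW]; exact_mod_cast hi,
      by positivity, by show (j : Int) < H; rw [hH]; exact_mod_cast hj, ?_⟩
    intro hm
    rw [(hNmem i j hj).2 hm] at hwf
    cases hwf
  have hokwall : ∀ i j : Nat, i < W' → j < H' → pvOkG W H grid ((i : Int), (j : Int)) →
      PySem.Set.contains wallN ((i * H' + j : Nat) : Int) = false := by
    intro i j hi hj hokc
    by_cases hc : PySem.Set.contains wallN ((i * H' + j : Nat) : Int) = true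
    · exact absurd ((hNmem i j hj).1 hc) ((hok _).1 hokc).2.2.2.2
    · simpa using hc
  -- seeds: every border cell is in the initial queue
  have hseed : ∀ i j : Nat, i < W' → j < H' → (i = 0 ∨ i = W' - 1 ∨ j = 0 ∨ j = H' - 1) →
      ((i : Int), (j : Int)) ∈ q1 := by
    intro i j hi hj hb
    rw [hq1def, pvSeeds_mem W H]
    rcases hb with hb | hb | hb | hb
    · right; exact ⟨(j : Int), ⟨by positivity, by rw [hH]; exact_mod_cast hj⟩,
        Or.inl (by subst hb; simp)⟩
    · right
      refine ⟨(j : Int), ⟨by positivity, by rw [hH]; exact_mod_cast hj⟩, Or.inr ?_⟩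
      have he : (i : Int) = W - 1 := by rw [hW]; omega
      rw [he]
    · left; exact ⟨(i : Int), ⟨by positivity, by rw [hW]; exact_mod_cast hi⟩,
        Or.inl (by subst hb; simp)⟩
    · left
      refine ⟨(i : Int), ⟨by positivity, by rw [hW]; exact_mod_cast hi⟩, Or.inr ?_⟩
      have he : (j : Int) = H - 1 := by rw [hH]; omega
      rw [he]
  -- ===== the Good invariant: connectivity respects visitedness =====
  set Good : Nat → Prop := fun z => z = OUT ∨
      ∃ i j, i < W' ∧ j < H' ∧ z = i * H' + j ∧ pvVis visited ((i : Int), (j : Int)) with hGood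
  have hGcell : ∀ i j : Nat, i < W' → j < H' →
      (Good (i * H' + j) ↔ pvVis visited ((i : Int), (j : Int))) := by
    intro i j hi hj
    rw [hGood]
    constructor
    · rintro (hz | ⟨i', j', hi', hj', hz, hv⟩)
      · exact absurd hz (by have := pvEncLt hi hj; omega)
      · obtain ⟨e1, e2⟩ := pvEncInj hj' hj hz.symm
        rw [← e1, ← e2]; exact hv
    · intro hv
      exact Or.inr ⟨i, j, hi, hj, rfl, hv⟩
  have hGoodEdge : ∀ x y, E x y → (Good x ↔ Good y) := by
    intro x y hxy
    rcases (pvEdgeMem W' H' wallN x y).1 hxy with ⟨i, j, hi, hj, rfl, hwx, hcase⟩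
    rcases hcase with ⟨hc1, hc2, rfl⟩ | ⟨hc1, hc2, rfl⟩ | ⟨hcb, rfl⟩
    · -- right neighbour: (i, j) — (i+1, j)
      have henc : i * H' + j + H' = (i + 1) * H' + j := by ring
      rw [hGcell i j hi hj, henc, hGcell (i + 1) j hc1 hj]
      have hmem1 : (((i + 1 : Nat) : Int), (j : Int)) ∈ pvNbrs ((i : Int), (j : Int)) := by
        simp [pvNbrs, Prod.ext_iff]
      have hok1 : pvOkG W H grid (((i + 1 : Nat) : Int), (j : Int)) :=
        hokflat (i + 1) j hc1 hj (by rw [← henc]; exact hc2)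
      have hok0 : pvOkG W H grid ((i : Int), (j : Int)) := hokflat i j hi hj hwx
      constructor
      · intro hv
        have := hVclo _ hv _ hmem1 hok1
        simpa using this
      · intro hv
        refine hVclo _ ?_ _ (pvNbrs_symm _ _ hmem1) hok0
        simpa using hv
    · -- down neighbour: (i, j) — (i, j+1)
      have henc : i * H' + j + 1 = i * H' + (j + 1) := by ring
      rw [hGcell i j hi hj, henc, hGcell i (j + 1) hi hc1]
      have hmem1 : ((i : Int), ((j + 1 : Nat) : Int)) ∈ pvNbrs ((i : Int), (j : Int)) := by
        simp [pvNbrs, Prod.ext_iff]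
      have hok1 : pvOkG W H grid ((i : Int), ((j + 1 : Nat) : Int)) :=
        hokflat i (j + 1) hi hc1 (by rw [← henc]; exact hc2)
      have hok0 : pvOkG W H grid ((i : Int), (j : Int)) := hokflat i j hi hj hwx
      constructor
      · intro hv
        have := hVclo _ hv _ hmem1 hok1
        simpa using this
      · intro hv
        refine hVclo _ ?_ _ (pvNbrs_symm _ _ hmem1) hok0
        simpa using hv
    · -- border cell — OUT
      rw [hGcell i j hi hj]
      constructor
      · intro _; exact Or.inl rfl
      · intro _
        exact hVseed _ (hseed i j hi hj hcb) (hokflat i j hi hj hwx)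
  have hGoodConn : ∀ x y, pvConn E x y → (Good x ↔ Good y) := by
    intro x y hc
    induction hc with
    | rel hr => exact hGoodEdge _ _ hr
    | refl x => exact Iff.rfl
    | symm _ ih => exact ih.symm
    | trans _ _ ih1 ih2 => exact ih1.trans ih2
  -- connectivity to OUT implies visited
  have hCV : ∀ i j : Nat, i < W' → j < H' → pvConn E (i * H' + j) OUT →
      pvVis visited ((i : Int), (j : Int)) := by
    intro i j hi hj hc
    exact (hGcell i j hi hj).1 ((hGoodConn _ _ hc).2 (Or.inl rfl))
  -- visited implies connectivity to OUT
  have hVC : ∀ c, pvVis visited c →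
      pvOkG W H grid c ∧ pvConn E (c.1.toNat * H' + c.2.toNat) OUT := by
    apply pvBfs_min W H grid vis0 q1 (pvDims_vis0 W H)
      (fun c => pvOkG W H grid c ∧ pvConn E (c.1.toNat * H' + c.2.toNat) OUT)
    · intro c hc
      exact absurd hc.2.2 (by rw [hvis0, pvGet2_vis0]; simp)
    · rintro ⟨cx, cy⟩ hcq hokc
      refine ⟨hokc, ?_⟩
      have hb1 : (0 : Int) ≤ cx := hokc.1
      have hb2 : cx < W := hokc.2.1
      have hb3 : (0 : Int) ≤ cy := hokc.2.2.1
      have hb4 : cy < H := hokc.2.2.2.1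
      rw [hW] at hb2; rw [hH] at hb4
      have hi : cx.toNat < W' := by omega
      have hj : cy.toNat < H' := by omega
      have hokc' : pvOkG W H grid ((cx.toNat : Int), (cy.toNat : Int)) := by
        have he : ((cx.toNat : Int), (cy.toNat : Int)) = ((cx, cy) : Int × Int) := by
          rw [Prod.mk.injEq]; omega
        rw [he]; exact hokc
      have hwx := hokwall cx.toNat cy.toNat hi hj hokc'
      have hbord : cx.toNat = 0 ∨ cx.toNat = W' - 1 ∨ cy.toNat = 0 ∨ cy.toNat = H' - 1 := by
        rw [hq1def, pvSeeds_mem W H] at hcq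
        rcases hcq with ⟨i', ⟨hi'1, hi'2⟩, hc' | hc'⟩ | ⟨j', ⟨hj'1, hj'2⟩, hc' | hc'⟩ <;>
          rw [Prod.mk.injEq] at hc'
        · right; right; left; omega
        · right; right; right
          rw [hH] at hc'; omega
        · left; omega
        · right; left
          rw [hW] at hc'; omega
      exact pvConn.rel ((pvEdgeMem W' H' wallN _ _).2
        ⟨cx.toNat, cy.toNat, hi, hj, rfl, hwx, Or.inr (Or.inr ⟨hbord, rfl⟩)⟩)
    · rintro ⟨cx, cy⟩ ⟨hokc, hconn⟩ ⟨dx, dy⟩ hdn hokd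
      refine ⟨hokd, ?_⟩
      have ha1 : (0 : Int) ≤ cx := hokc.1
      have ha2 : cx < W := hokc.2.1
      have ha3 : (0 : Int) ≤ cy := hokc.2.2.1
      have ha4 : cy < H := hokc.2.2.2.1
      have hb1 : (0 : Int) ≤ dx := hokd.1
      have hb2 : dx < W := hokd.2.1
      have hb3 : (0 : Int) ≤ dy := hokd.2.2.1
      have hb4 : dy < H := hokd.2.2.2.1
      rw [hW] at ha2 hb2; rw [hH] at ha4 hb4
      have hi : cx.toNat < W' := by omega
      have hj : cy.toNat < H' := by omega
      have hi' : dx.toNat < W' := by omega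
      have hj' : dy.toNat < H' := by omega
      have hokc' : pvOkG W H grid ((cx.toNat : Int), (cy.toNat : Int)) := by
        have he : ((cx.toNat : Int), (cy.toNat : Int)) = ((cx, cy) : Int × Int) := by
          rw [Prod.mk.injEq]; omega
        rw [he]; exact hokc
      have hokd' : pvOkG W H grid ((dx.toNat : Int), (dy.toNat : Int)) := by
        have he : ((dx.toNat : Int), (dy.toNat : Int)) = ((dx, dy) : Int × Int) := by
          rw [Prod.mk.injEq]; omega
        rw [he]; exact hokd
      have hwc := hokwall cx.toNat cy.toNat hi hj hokc'
      have hwd := hokwall dx.toNat dy.toNat hi' hj' hokd'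
      simp only [pvNbrs, List.mem_cons, List.not_mem_nil, or_false, Prod.mk.injEq] at hdn
      rcases hdn with ⟨h1, h2⟩ | ⟨h1, h2⟩ | ⟨h1, h2⟩ | ⟨h1, h2⟩
      · -- dx = cx + 1
        have e1 : dx.toNat = cx.toNat + 1 := by omega
        have e2 : dy.toNat = cy.toNat := by omega
        have hedge : (cx.toNat * H' + cy.toNat, cx.toNat * H' + cy.toNat + H') ∈ Ed := by
          apply (pvEdgeMem W' H' wallN _ _).2
          refine ⟨cx.toNat, cy.toNat, hi, hj, rfl, hwc, Or.inl ⟨by omega, ?_, rfl⟩⟩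
          have he : cx.toNat * H' + cy.toNat + H' = dx.toNat * H' + dy.toNat := by
            rw [e1, e2]; ring
          rw [he]; exact hwd
        have he : dx.toNat * H' + dy.toNat = cx.toNat * H' + cy.toNat + H' := by
          rw [e1, e2]; ring
        rw [he]
        exact pvConn.trans (pvConn.symm (pvConn.rel hedge)) hconn
      · -- dx = cx - 1
        have e1 : cx.toNat = dx.toNat + 1 := by omega
        have e2 : dy.toNat = cy.toNat := by omega
        have he : dx.toNat * H' + dy.toNat + H' = cx.toNat * H' + cy.toNat := by
          rw [e1, e2]; ring
        have hedge : (dx.toNat * H' + dy.toNat, dx.toNat * H' + dy.toNat + H') ∈ Ed := by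
          apply (pvEdgeMem W' H' wallN _ _).2
          refine ⟨dx.toNat, dy.toNat, hi', hj', rfl, hwd, Or.inl ⟨by omega, ?_, rfl⟩⟩
          rw [he]; exact hwc
        have hconn' : pvConn E (dx.toNat * H' + dy.toNat + H') OUT := by
          rw [he]; exact hconn
        exact pvConn.trans (pvConn.rel hedge) hconn'
      · -- dy = cy + 1
        have e1 : dx.toNat = cx.toNat := by omega
        have e2 : dy.toNat = cy.toNat + 1 := by omega
        have hedge : (cx.toNat * H' + cy.toNat, cx.toNat * H' + cy.toNat + 1) ∈ Ed := by
          apply (pvEdgeMem W' H' wallN _ _).2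
          refine ⟨cx.toNat, cy.toNat, hi, hj, rfl, hwc, Or.inr (Or.inl ⟨by omega, ?_, rfl⟩)⟩
          have he : cx.toNat * H' + cy.toNat + 1 = dx.toNat * H' + dy.toNat := by
            rw [e1, e2]; omega
          rw [he]; exact hwd
        have he : dx.toNat * H' + dy.toNat = cx.toNat * H' + cy.toNat + 1 := by
          rw [e1, e2]; omega
        rw [he]
        exact pvConn.trans (pvConn.symm (pvConn.rel hedge)) hconn
      · -- dy = cy - 1
        have e1 : dx.toNat = cx.toNat := by omega
        have e2 : cy.toNat = dy.toNat + 1 := by omega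
        have he : dx.toNat * H' + dy.toNat + 1 = cx.toNat * H' + cy.toNat := by
          rw [e1, e2]; ring
        have hedge : (dx.toNat * H' + dy.toNat, dx.toNat * H' + dy.toNat + 1) ∈ Ed := by
          apply (pvEdgeMem W' H' wallN _ _).2
          refine ⟨dx.toNat, dy.toNat, hi', hj', rfl, hwd, Or.inr (Or.inl ⟨by omega, ?_, rfl⟩)⟩
          rw [he]; exact hwc
        have hconn' : pvConn E (dx.toNat * H' + dy.toNat + 1) OUT := by
          rw [he]; exact hconn
        exact pvConn.trans (pvConn.rel hedge) hconn'
  -- the per-cell Boolean correspondence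
  have hcell : ∀ i j : Nat, i < W' → j < H' →
      (!(pvGet2 visited (i : Int) (j : Int) false)) =
        (PySem.Set.contains wallN ((i * H' + j : Nat) : Int) || (dsuRoot parent (i * H' + j) != rootO)) := by
    intro i j hi hj
    have hiff : pvGet2 visited (i : Int) (j : Int) false = true ↔
        (PySem.Set.contains wallN ((i * H' + j : Nat) : Int) = false ∧ dsuRoot parent (i * H' + j) = rootO) := by
      constructor
      · intro hv
        have hvv : pvVis visited ((i : Int), (j : Int)) := ⟨by positivity, by positivity, hv⟩
        have h1 := hokwall i j hi hj (hVsub _ hvv)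
        have h2 := (hVC _ hvv).2
        simp only [Int.toNat_natCast] at h2
        exact ⟨h1, (hfind _).2 h2⟩
      · rintro ⟨h1, h2⟩
        exact (hCV i j hi hj ((hfind _).1 h2)).2.2
    cases hvb : pvGet2 visited (i : Int) (j : Int) false
    · simp only [Bool.not_false]
      symm
      rw [Bool.or_eq_true]
      by_cases hcw : PySem.Set.contains wallN ((i * H' + j : Nat) : Int) = true
      · exact Or.inl hcw
      · refine Or.inr ?_
        rw [bne_iff_ne]
        intro heq
        have := hiff.2 ⟨by simpa using hcw, heq⟩
        rw [this] at hvb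
        cases hvb
    · simp only [Bool.not_true]
      obtain ⟨h1, h2⟩ := hiff.1 hvb
      symm
      rw [Bool.or_eq_false_iff]
      exact ⟨h1, by rw [bne_eq_false_iff_eq]; exact h2⟩
  -- ===== final assembly =====
  rw [pvAllowedEq W H xs ys visited (PySem.Set.ofList bnd)]
  congr 1
  rw [hW, PySem.List.pyRange_zero_natCast W', List.flatMap_map]
  apply List.flatMap_congr
  intro i hri
  rw [List.mem_range] at hri
  rw [hH, PySem.List.pyRange_zero_natCast H', List.filter_map, List.map_map]
  have hfc : List.filter ((fun j => !(pvGet2 visited (i : Int) j false)) ∘ (fun k : Nat => (k : Int)))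
      (List.range H')
      = List.filter (fun j => PySem.Set.contains wallN ((i * H' + j : Nat) : Int) ||
          (dsuRoot parent (i * H' + j) != rootO)) (List.range H') := by
    apply List.filter_congr
    intro j hrj
    rw [List.mem_range] at hrj
    simpa using hcell i j hri hrj
  rw [hfc]
  apply List.map_congr_left
  intro j hrj
  simp [PySem.List.pyGetD_natCast]

theorem pvMain (pts : List (Int × Int)) : build_allowed_tiles pts = build_allowed_tiles_alt pts := by
  have hA : build_allowed_tiles pts = (PySem.Set.ofList pts,
      pvStageA (PySem.Set.union (PySem.Set.ofList pts) (pvGreenA pts (PySem.Set.ofList pts)))) := rfl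
  have hB : build_allowed_tiles_alt pts = (PySem.Set.ofList pts,
      pvStageB (PySem.Set.union (PySem.Set.ofList pts) (pvGreenB pts (PySem.Set.ofList pts)))) := rfl
  rw [hA, hB, pvGreenAB]
  rw [pvStageEq]

-- ===== VERDICT (by name: the statement is the Claim_ definition above) =====
theorem build_allowed_tiles_spec : Claim_equal_build_allowed_tiles := by
  intro red_points _
  unfold Spec_build_allowed_tiles
  exact pvMain red_points
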